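-- pv_equiv track=rewrite | github.com/lantoli/codejam-python | EuroPython-2013-C-BadHorse/badhorse.py | solve_rec
-- ===== SOURCE A (Python) =====
-- def solve_rec(list, set1, set2):
--     if len(list) == 0: return True
--     newlist = []
--     for a,b in list:
--         if a in set1:
--             if b in set1: return False
--             else: set2.add(b)
--         elif a in set2:
--             if b in set2: return False
--             else: set1.add(b)
--         elif b in set1: set2.add(a)
--         elif b in set2: set1.add(a)
--         else: newlist.append((a,b))
--     if len(list) == len(newlist):
--         a, b = list.pop()
--         set1.add(a)
--         set2.add(b)
--         return solve_rec(list, set1, set2)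
--     else:
--         return solve_rec(newlist, set1, set2) if newlist else True
-- ===== SOURCE B (Python) =====
-- # One-pass component-merging 2-colorability check (explicit two-sided groups),
-- # replacing A's repeated propagation passes; return value only: A mutates its
-- # arguments (pops from list, adds to the sets), B does not.
-- def solve_rec(list, set1, set2):
--     groups = [(set(set1), set(set2))]
--
--     def find(v):
--         for i, (l, r) in enumerate(groups):
--             if v in l:
--                 return i, True
--             if v in r:
--                 return i, False
--         return None
--
--     for a, b in list:
--         fa, fb = find(a), find(b)
--         if fa is None and fb is None:
--             groups.append(({a}, {b}))
--         elif fb is None: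
--             i, sa = fa
--             l, r = groups[i]
--             groups[i] = (l, r | {b}) if sa else (l | {b}, r)
--         elif fa is None:
--             j, sb = fb
--             l, r = groups[j]
--             groups[j] = (l, r | {a}) if sb else (l | {a}, r)
--         else:
--             i, sa = fa
--             j, sb = fb
--             if i == j:
--                 if sa == sb:
--                     return False
--             else:
--                 l1, r1 = groups[i]
--                 l2, r2 = groups[j]
--                 groups[i] = (l1 | r2, r1 | l2) if sa == sb else (l1 | l2, r1 | r2)
--                 del groups[j]
--     return True
-- ===== Notes on version B (the rewrite author's own statement) =====
-- stated objective: alternative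
-- what changed: A repeatedly re-scans the edge list, propagating the two gang sets pass after pass and recursing with an arbitrary seed when stuck; B makes a single pass over the edges, maintaining a list of two-sided components that it extends and merges (a union-find-style parity structure), so the repeated passes and the recursion disappear. …
-- outside the precondition, e.g. on solve_rec([('a', 'b'), ('a', 'a')], set(), set()): A returns True, B returns False; on solve_rec([('v3', 'v0')], {'v2', 'v0'}, {'v3', 'v0'}): A returns False, B returns True
import Mathlib
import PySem

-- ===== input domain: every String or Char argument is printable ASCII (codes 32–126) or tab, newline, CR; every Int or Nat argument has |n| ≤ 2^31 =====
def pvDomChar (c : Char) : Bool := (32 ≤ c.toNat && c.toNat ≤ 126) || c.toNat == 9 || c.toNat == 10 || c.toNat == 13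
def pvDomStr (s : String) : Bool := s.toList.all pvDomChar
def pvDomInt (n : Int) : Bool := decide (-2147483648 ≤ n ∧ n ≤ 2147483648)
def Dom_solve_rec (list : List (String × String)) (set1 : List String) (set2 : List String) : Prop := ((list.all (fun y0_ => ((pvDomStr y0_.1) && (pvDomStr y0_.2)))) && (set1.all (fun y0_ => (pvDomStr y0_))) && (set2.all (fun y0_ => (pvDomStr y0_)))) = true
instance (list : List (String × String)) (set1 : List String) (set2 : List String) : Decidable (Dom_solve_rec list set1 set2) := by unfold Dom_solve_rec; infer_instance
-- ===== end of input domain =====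

-- B replaces A's repeated propagation passes by a single pass that merges two-sided
-- components (alternative algorithm, similar cost); equivalence is about the RETURN
-- value only: A mutates its arguments (pops from list, adds to the sets), B does not.

-- ===== PORT A =====
-- one 'for a,b in list' pass of A: returns none for 'return False', otherwise
-- (newlist, set1, set2) after the loop
def aPass : List (String × String) → List String → List String → List (String × String) →
    Option (List (String × String) × List String × List String)
  | [], s1, s2, acc => some (acc, s1, s2)
  | (a, b) :: rest, s1, s2, acc =>
    if a ∈ s1 then
      if b ∈ s1 then none else aPass rest s1 (PySem.Set.add s2 b) acc
    else if a ∈ s2 then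
      if b ∈ s2 then none else aPass rest (PySem.Set.add s1 b) s2 acc
    else if b ∈ s1 then aPass rest s1 (PySem.Set.add s2 a) acc
    else if b ∈ s2 then aPass rest (PySem.Set.add s1 a) s2 acc
    else aPass rest s1 s2 (acc ++ [(a, b)])

-- used by solve_rec's decreasing_by
theorem aPass_length_le : ∀ (es : List (String × String)) (s1 s2 : List String) acc nl t1 t2,
    aPass es s1 s2 acc = some (nl, t1, t2) → nl.length ≤ acc.length + es.length := by
  intro es
  induction es with
  | nil => intro s1 s2 acc nl t1 t2 h; simp [aPass] at h; simp [h.1]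
  | cons e rest ih =>
    intro s1 s2 acc nl t1 t2 h
    obtain ⟨a, b⟩ := e
    simp only [aPass] at h
    split_ifs at h with h1 h2 h3 h4 h5 h6 <;>
      (have := ih _ _ _ _ _ _ h; simp [List.length_append] at this ⊢; omega)

def solve_rec (list : List (String × String)) (set1 : List String) (set2 : List String) : Bool :=
  if hl : list.length = 0 then true
  else
    match h : aPass list set1 set2 [] with
    | none => false
    | some (newlist, s1, s2) =>
      if list.length = newlist.length then
        -- a, b = list.pop(); set1.add(a); set2.add(b); recurse on the shortened list
        let p := list.getLast (fun hnil => hl (by simp [hnil]))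
        solve_rec list.dropLast (PySem.Set.add s1 p.1) (PySem.Set.add s2 p.2)
      else if newlist ≠ [] then solve_rec newlist s1 s2
      else true
termination_by list.length
decreasing_by
  · have : list ≠ [] := fun hnil => hl (by simp [hnil])
    simp [List.length_dropLast]
    omega
  · have hle := aPass_length_le list set1 set2 [] newlist s1 s2 h
    simp at hle
    omega

-- ===== PORT B =====
-- find(v): first group containing v, with its side (true = left)
def bFind : List (List String × List String) → String → Option (Nat × Bool)
  | [], _ => none
  | (l, r) :: gs, v =>
    if v ∈ l then some (0, true)
    else if v ∈ r then some (0, false)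
    else (bFind gs v).map (fun p => (p.1 + 1, p.2))

-- one edge: extend/merge the groups, none = 'return False'
def bStep (gl : List (List String × List String)) (a b : String) :
    Option (List (List String × List String)) :=
  match bFind gl a, bFind gl b with
  | none, none => some (gl ++ [([a], [b])])
  | some (i, sa), none =>
    -- l, r = groups[i]; add b to the side opposite a's
    some (gl.set i (if sa then ((gl.getD i ([], [])).1, PySem.Set.add (gl.getD i ([], [])).2 b)
                    else (PySem.Set.add (gl.getD i ([], [])).1 b, (gl.getD i ([], [])).2)))
  | none, some (j, sb) =>
    some (gl.set j (if sb then ((gl.getD j ([], [])).1, PySem.Set.add (gl.getD j ([], [])).2 a)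
                    else (PySem.Set.add (gl.getD j ([], [])).1 a, (gl.getD j ([], [])).2)))
  | some (i, sa), some (j, sb) =>
    if i = j then (if sa = sb then none else some gl)
    else
      -- merge group j into group i, orienting b opposite a
      some ((gl.set i (if sa = sb then
              (PySem.Set.union (gl.getD i ([], [])).1 (gl.getD j ([], [])).2,
               PySem.Set.union (gl.getD i ([], [])).2 (gl.getD j ([], [])).1)
            else
              (PySem.Set.union (gl.getD i ([], [])).1 (gl.getD j ([], [])).1,
               PySem.Set.union (gl.getD i ([], [])).2 (gl.getD j ([], [])).2))).eraseIdx j)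

def bLoop : List (String × String) → List (List String × List String) → Bool
  | [], _ => true
  | (a, b) :: rest, gl =>
    match bStep gl a b with
    | none => false
    | some gl' => bLoop rest gl'

def solve_rec_alt (list : List (String × String)) (set1 : List String) (set2 : List String) : Bool :=
  bLoop list [(PySem.Set.ofList set1, PySem.Set.ofList set2)]

-- ===== PRECONDITION & SPEC =====
-- Pre_ excludes edges with an endpoint in set1 ∩ set2 and self-loop edges (v,v) on
-- unseeded vertices: on those degenerate, unsatisfiable constraint systems the two
-- programs' True/False answers are order-dependent accidents of branch order and
-- seeding, and neither value is the specified one.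
def Pre_solve_rec (list : List (String × String)) (set1 : List String) (set2 : List String) : Prop :=
  (∀ p ∈ list, ¬(p.1 ∈ set1 ∧ p.1 ∈ set2) ∧ ¬(p.2 ∈ set1 ∧ p.2 ∈ set2)) ∧
  (∀ p ∈ list, p.1 = p.2 → p.1 ∈ set1 ∨ p.1 ∈ set2)
instance (list : List (String × String)) (set1 : List String) (set2 : List String) : Decidable (Pre_solve_rec list set1 set2) := by unfold Pre_solve_rec; infer_instance

def pvWitness_solve_rec : (List (String × String)) × List String × List String :=
  ([("a", "b"), ("b", "c")], ["a"], ["c"])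

def Spec_solve_rec (list : List (String × String)) (set1 : List String) (set2 : List String) (out : Bool) : Prop := out = solve_rec_alt list set1 set2
instance (list : List (String × String)) (set1 : List String) (set2 : List String) (out : Bool) : Decidable (Spec_solve_rec list set1 set2 out) := by unfold Spec_solve_rec; infer_instance

-- ===== CLAIM (what is proved, stated in full; the proofs are below) =====
def Claim_equal_solve_rec : Prop := ∀ (list : List (String × String)) (set1 : List String) (set2 : List String), Dom_solve_rec list set1 set2 → Pre_solve_rec list set1 set2 → Spec_solve_rec list set1 set2 (solve_rec list set1 set2)

-- ===== LEMMAS AND PROOFS =====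

-- the strict sub-domain (no self-loops, disjoint seeds) on which both programs are
-- proved to decide satisfiability; Pre_ inputs are reduced to it below
def PreStrict (list : List (String × String)) (set1 : List String) (set2 : List String) : Prop :=
  (∀ p ∈ list, p.1 ≠ p.2) ∧ (∀ v ∈ set1, v ∉ set2)

-- Both programs decide satisfiability of the 2-coloring constraints:
def EdgesOK (c : String → Bool) (E : List (String × String)) : Prop := ∀ p ∈ E, c p.1 ≠ c p.2
def SeedsOK (c : String → Bool) (s1 s2 : List String) : Prop :=
  (∀ v ∈ s1, c v = true) ∧ (∀ v ∈ s2, c v = false)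
def Sat (E : List (String × String)) (s1 s2 : List String) : Prop :=
  ∃ c, EdgesOK c E ∧ SeedsOK c s1 s2

theorem Sat_mono {E1 E2 : List (String × String)} {s1 s2 : List String}
    (hsub : ∀ p ∈ E1, p ∈ E2) : Sat E2 s1 s2 → Sat E1 s1 s2 := by
  rintro ⟨c, hE, hS⟩; exact ⟨c, fun p hp => hE p (hsub p hp), hS⟩

theorem Sat_congr {E1 E2 : List (String × String)} {s1 s2 : List String}
    (h : ∀ p, p ∈ E1 ↔ p ∈ E2) : Sat E1 s1 s2 ↔ Sat E2 s1 s2 :=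
  ⟨Sat_mono (fun p hp => (h p).mpr hp), Sat_mono (fun p hp => (h p).mp hp)⟩

theorem Sat_nil {s1 s2 : List String} (hd : ∀ v ∈ s1, v ∉ s2) : Sat [] s1 s2 := by
  refine ⟨fun v => decide (v ∈ s1), by intro p hp; simp at hp, ?_, ?_⟩
  · intro v hv; simp [hv]
  · intro v hv; simp; exact fun h => hd v h hv

theorem Sat_step_a1 {E s1 s2 a b} (ha : a ∈ s1) :
    Sat ((a, b) :: E) s1 s2 ↔ Sat E s1 (PySem.Set.add s2 b) := by
  constructor
  · rintro ⟨c, hE, h1, h2⟩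
    refine ⟨c, fun p hp => hE p (List.mem_cons_of_mem _ hp), h1, ?_⟩
    intro v hv
    rcases (PySem.Set.mem_add _ _ _).mp hv with h | h
    · exact h2 v h
    · rw [h]
      have := hE (a, b) (List.mem_cons_self ..)
      have hca := h1 a ha
      simp [hca] at this
      simpa using this
  · rintro ⟨c, hE, h1, h2⟩
    refine ⟨c, ?_, h1, fun v hv => h2 v ((PySem.Set.mem_add _ _ _).mpr (Or.inl hv))⟩
    intro p hp
    rcases List.mem_cons.mp hp with h | h
    · subst h
      have hca := h1 a ha
      have hcb := h2 b ((PySem.Set.mem_add _ _ _).mpr (Or.inr rfl))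
      simp [hca, hcb]
    · exact hE p h

theorem Sat_step_a2 {E s1 s2 a b} (ha : a ∈ s2) :
    Sat ((a, b) :: E) s1 s2 ↔ Sat E (PySem.Set.add s1 b) s2 := by
  constructor
  · rintro ⟨c, hE, h1, h2⟩
    refine ⟨c, fun p hp => hE p (List.mem_cons_of_mem _ hp), ?_, h2⟩
    intro v hv
    rcases (PySem.Set.mem_add _ _ _).mp hv with h | h
    · exact h1 v h
    · rw [h]
      have := hE (a, b) (List.mem_cons_self ..)
      have hca := h2 a ha
      simp [hca] at this
      simpa using this
  · rintro ⟨c, hE, h1, h2⟩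
    refine ⟨c, ?_, fun v hv => h1 v ((PySem.Set.mem_add _ _ _).mpr (Or.inl hv)), h2⟩
    intro p hp
    rcases List.mem_cons.mp hp with h | h
    · subst h
      have hca := h2 a ha
      have hcb := h1 b ((PySem.Set.mem_add _ _ _).mpr (Or.inr rfl))
      simp [hca, hcb]
    · exact hE p h

theorem Sat_step_b1 {E s1 s2 a b} (hb : b ∈ s1) :
    Sat ((a, b) :: E) s1 s2 ↔ Sat E s1 (PySem.Set.add s2 a) := by
  constructor
  · rintro ⟨c, hE, h1, h2⟩
    refine ⟨c, fun p hp => hE p (List.mem_cons_of_mem _ hp), h1, ?_⟩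
    intro v hv
    rcases (PySem.Set.mem_add _ _ _).mp hv with h | h
    · exact h2 v h
    · rw [h]
      have := hE (a, b) (List.mem_cons_self ..)
      have hcb := h1 b hb
      simp [hcb] at this
      simpa using this
  · rintro ⟨c, hE, h1, h2⟩
    refine ⟨c, ?_, h1, fun v hv => h2 v ((PySem.Set.mem_add _ _ _).mpr (Or.inl hv))⟩
    intro p hp
    rcases List.mem_cons.mp hp with h | h
    · subst h
      have hcb := h1 b hb
      have hca := h2 a ((PySem.Set.mem_add _ _ _).mpr (Or.inr rfl))
      simp [hca, hcb]
    · exact hE p h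

theorem Sat_step_b2 {E s1 s2 a b} (hb : b ∈ s2) :
    Sat ((a, b) :: E) s1 s2 ↔ Sat E (PySem.Set.add s1 a) s2 := by
  constructor
  · rintro ⟨c, hE, h1, h2⟩
    refine ⟨c, fun p hp => hE p (List.mem_cons_of_mem _ hp), ?_, h2⟩
    intro v hv
    rcases (PySem.Set.mem_add _ _ _).mp hv with h | h
    · exact h1 v h
    · rw [h]
      have := hE (a, b) (List.mem_cons_self ..)
      have hcb := h2 b hb
      simp [hcb] at this
      simpa using this
  · rintro ⟨c, hE, h1, h2⟩
    refine ⟨c, ?_, fun v hv => h1 v ((PySem.Set.mem_add _ _ _).mpr (Or.inl hv)), h2⟩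
    intro p hp
    rcases List.mem_cons.mp hp with h | h
    · subst h
      have hcb := h2 b hb
      have hca := h1 a ((PySem.Set.mem_add _ _ _).mpr (Or.inr rfl))
      simp [hca, hcb]
    · exact hE p h

theorem not_Sat_conflict1 {E : List (String × String)} {s1 s2 a b} (ha : a ∈ s1) (hb : b ∈ s1) :
    ¬ Sat ((a, b) :: E) s1 s2 := by
  rintro ⟨c, hE, h1, _⟩
  have := hE (a, b) (List.mem_cons_self ..)
  simp [h1 a ha, h1 b hb] at this

theorem not_Sat_conflict2 {E : List (String × String)} {s1 s2 a b} (ha : a ∈ s2) (hb : b ∈ s2) :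
    ¬ Sat ((a, b) :: E) s1 s2 := by
  rintro ⟨c, hE, _, h2⟩
  have := hE (a, b) (List.mem_cons_self ..)
  simp [h2 a ha, h2 b hb] at this

theorem aPass_sat : ∀ (es : List (String × String)) s1 s2 acc nl t1 t2,
    aPass es s1 s2 acc = some (nl, t1, t2) → (Sat (es ++ acc) s1 s2 ↔ Sat nl t1 t2) := by
  intro es
  induction es with
  | nil =>
    intro s1 s2 acc nl t1 t2 h
    simp [aPass] at h
    obtain ⟨h1, h2, h3⟩ := h
    subst h1; subst h2; subst h3
    simp
  | cons e rest ih =>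
    obtain ⟨a, b⟩ := e
    intro s1 s2 acc nl t1 t2 h
    simp only [aPass] at h
    rw [List.cons_append]
    split_ifs at h with h1 h2 h3 h4 h5 h6
    · exact (Sat_step_a1 h1).trans (ih _ _ _ _ _ _ h)
    · exact (Sat_step_a2 h3).trans (ih _ _ _ _ _ _ h)
    · exact (Sat_step_b1 h5).trans (ih _ _ _ _ _ _ h)
    · exact (Sat_step_b2 h6).trans (ih _ _ _ _ _ _ h)
    · exact (Sat_congr (by intro p; simp [List.mem_append, List.mem_cons]; tauto)).trans
        (ih _ _ _ _ _ _ h)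

theorem aPass_none : ∀ (es : List (String × String)) s1 s2 acc,
    aPass es s1 s2 acc = none → ¬ Sat (es ++ acc) s1 s2 := by
  intro es
  induction es with
  | nil => intro s1 s2 acc h; simp [aPass] at h
  | cons e rest ih =>
    obtain ⟨a, b⟩ := e
    intro s1 s2 acc h
    simp only [aPass] at h
    rw [List.cons_append]
    split_ifs at h with h1 h2 h3 h4 h5 h6
    · exact not_Sat_conflict1 h1 h2
    · exact fun hs => ih _ _ _ h ((Sat_step_a1 h1).mp hs)
    · exact not_Sat_conflict2 h3 h4
    · exact fun hs => ih _ _ _ h ((Sat_step_a2 h3).mp hs)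
    · exact fun hs => ih _ _ _ h ((Sat_step_b1 h5).mp hs)
    · exact fun hs => ih _ _ _ h ((Sat_step_b2 h6).mp hs)
    · exact fun hs => ih _ _ _ h
        ((Sat_congr (by intro p; simp [List.mem_append, List.mem_cons]; tauto)).mp hs)

theorem aPass_mem : ∀ (es : List (String × String)) s1 s2 acc nl t1 t2,
    aPass es s1 s2 acc = some (nl, t1, t2) → ∀ p ∈ nl, p ∈ es ++ acc := by
  intro es
  induction es with
  | nil =>
    intro s1 s2 acc nl t1 t2 h p hp
    simp [aPass] at h
    obtain ⟨h1, _, _⟩ := h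
    subst h1; simpa using hp
  | cons e rest ih =>
    obtain ⟨a, b⟩ := e
    intro s1 s2 acc nl t1 t2 h p hp
    simp only [aPass] at h
    split_ifs at h with h1 h2 h3 h4 h5 h6 <;>
      first
        | exact absurd h (by simp)
        | (have := ih _ _ _ _ _ _ h p hp; simp [List.mem_append, List.mem_cons] at this ⊢; tauto)

theorem aPass_disjoint : ∀ (es : List (String × String)) s1 s2 acc nl t1 t2,
    aPass es s1 s2 acc = some (nl, t1, t2) → (∀ v ∈ s1, v ∉ s2) → ∀ v ∈ t1, v ∉ t2 := by
  intro es
  induction es with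
  | nil =>
    intro s1 s2 acc nl t1 t2 h hd
    simp [aPass] at h
    obtain ⟨_, h2, h3⟩ := h
    subst h2; subst h3; exact hd
  | cons e rest ih =>
    obtain ⟨a, b⟩ := e
    intro s1 s2 acc nl t1 t2 h hd
    simp only [aPass] at h
    split_ifs at h with h1 h2 h3 h4 h5 h6
    · refine ih _ _ _ _ _ _ h ?_
      intro v hv
      intro hmem
      rcases (PySem.Set.mem_add _ _ _).mp hmem with h' | h'
      · exact hd v hv h'
      · exact h2 (h' ▸ hv)
    · refine ih _ _ _ _ _ _ h ?_
      intro v hv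
      rcases (PySem.Set.mem_add _ _ _).mp hv with hv' | hv'
      · exact hd v hv'
      · exact hv' ▸ h4
    · refine ih _ _ _ _ _ _ h ?_
      intro v hv
      intro hmem
      rcases (PySem.Set.mem_add _ _ _).mp hmem with h' | h'
      · exact hd v hv h'
      · exact h1 (h' ▸ hv)
    · refine ih _ _ _ _ _ _ h ?_
      intro v hv
      rcases (PySem.Set.mem_add _ _ _).mp hv with hv' | hv'
      · exact hd v hv'
      · exact hv' ▸ h3
    · exact ih _ _ _ _ _ _ h hd

theorem aPass_frozen : ∀ (es : List (String × String)) s1 s2 acc nl t1 t2,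
    aPass es s1 s2 acc = some (nl, t1, t2) → nl.length = acc.length + es.length →
    t1 = s1 ∧ t2 = s2 ∧ (∀ p ∈ es, p.1 ∉ s1 ∧ p.1 ∉ s2 ∧ p.2 ∉ s1 ∧ p.2 ∉ s2) := by
  intro es
  induction es with
  | nil =>
    intro s1 s2 acc nl t1 t2 h _
    simp [aPass] at h
    exact ⟨h.2.1.symm, h.2.2.symm, by simp⟩
  | cons e rest ih =>
    obtain ⟨a, b⟩ := e
    intro s1 s2 acc nl t1 t2 h hlen
    simp only [aPass] at h
    split_ifs at h with h1 h2 h3 h4 h5 h6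
    · have := aPass_length_le _ _ _ _ _ _ _ h; simp at hlen; omega
    · have := aPass_length_le _ _ _ _ _ _ _ h; simp at hlen; omega
    · have := aPass_length_le _ _ _ _ _ _ _ h; simp at hlen; omega
    · have := aPass_length_le _ _ _ _ _ _ _ h; simp at hlen; omega
    · have hrec := ih _ _ _ _ _ _ h (by simp [List.length_append] at hlen ⊢; omega)
      refine ⟨hrec.1, hrec.2.1, ?_⟩
      intro p hp
      rcases List.mem_cons.mp hp with hp' | hp'
      · subst hp'; exact ⟨h1, h3, h5, h6⟩
      · exact hrec.2.2 p hp'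

-- the component-flip ("seeding is WLOG") argument
def Adjc (E : List (String × String)) (x y : String) : Prop := (x, y) ∈ E ∨ (y, x) ∈ E

theorem reach_endpoint {E : List (String × String)} {a v : String}
    (h : Relation.ReflTransGen (Adjc E) a v) :
    v = a ∨ ∃ p ∈ E, v = p.1 ∨ v = p.2 := by
  induction h with
  | refl => exact Or.inl rfl
  | tail _ hadj _ =>
    rcases hadj with h' | h'
    · exact Or.inr ⟨_, h', Or.inr rfl⟩
    · exact Or.inr ⟨_, h', Or.inl rfl⟩

theorem reach_edge {E : List (String × String)} {a x y : String} (hxy : (x, y) ∈ E) :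
    Relation.ReflTransGen (Adjc E) a x ↔ Relation.ReflTransGen (Adjc E) a y :=
  ⟨fun hr => hr.tail (Or.inl hxy), fun hr => hr.tail (Or.inr hxy)⟩

theorem Sat_seed {E : List (String × String)} {s1 s2 : List String} {a b : String}
    (he : (a, b) ∈ E)
    (hfree : ∀ p ∈ E, p.1 ∉ s1 ∧ p.1 ∉ s2 ∧ p.2 ∉ s1 ∧ p.2 ∉ s2) :
    Sat E s1 s2 → Sat E (PySem.Set.add s1 a) (PySem.Set.add s2 b) := by
  rintro ⟨c, hE, h1, h2⟩
  classical
  have hne := hE (a, b) he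
  by_cases hca : c a = true
  · -- c already colours a true; c b is forced false
    have hcb : c b = false := by
      cases hcb' : c b
      · rfl
      · exact absurd (hca.trans hcb'.symm) hne
    refine ⟨c, hE, ?_, ?_⟩
    · intro v hv
      rcases (PySem.Set.mem_add _ _ _).mp hv with hv' | hv'
      · exact h1 v hv'
      · exact hv' ▸ hca
    · intro v hv
      rcases (PySem.Set.mem_add _ _ _).mp hv with hv' | hv'
      · exact h2 v hv'
      · exact hv' ▸ hcb
  · -- flip c on the connected component of a (all of it outside s1 ∪ s2)
    have hca' : c a = false := by simpa using hca
    have hcb : c b = true := by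
      cases hcb' : c b
      · exact absurd (hca'.trans hcb'.symm) hne
      · rfl
    have hnr : ∀ v, v ∈ s1 ∨ v ∈ s2 → ¬ Relation.ReflTransGen (Adjc E) a v := by
      intro v hv hr
      rcases reach_endpoint hr with h' | ⟨p, hp, h'⟩
      · have := hfree (a, b) he
        rcases hv with hv | hv
        · exact this.1 (h' ▸ hv)
        · exact this.2.1 (h' ▸ hv)
      · have := hfree p hp
        rcases h' with h' | h' <;> rcases hv with hv | hv
        · exact this.1 (h' ▸ hv)
        · exact this.2.1 (h' ▸ hv)
        · exact this.2.2.1 (h' ▸ hv)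
        · exact this.2.2.2 (h' ▸ hv)
    refine ⟨fun v => if Relation.ReflTransGen (Adjc E) a v then !c v else c v, ?_, ?_, ?_⟩
    · intro p hp
      have hiff := reach_edge (a := a) (x := p.1) (y := p.2) hp
      have hne' := hE p hp
      beta_reduce
      by_cases hr : Relation.ReflTransGen (Adjc E) a p.1
      · simp only [if_pos hr, if_pos (hiff.mp hr)]
        simpa using hne'
      · simp only [if_neg hr, if_neg (fun h' => hr (hiff.mpr h'))]
        exact hne'
    · intro v hv
      beta_reduce
      rcases (PySem.Set.mem_add _ _ _).mp hv with hv' | hv'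
      · rw [if_neg (hnr v (Or.inl hv'))]
        exact h1 v hv'
      · subst hv'
        rw [if_pos Relation.ReflTransGen.refl, hca']
        rfl
    · intro v hv
      beta_reduce
      rcases (PySem.Set.mem_add _ _ _).mp hv with hv' | hv'
      · rw [if_neg (hnr v (Or.inr hv'))]
        exact h2 v hv'
      · rw [hv', if_pos (Relation.ReflTransGen.single (show Adjc E a b from Or.inl he)), hcb]
        rfl

theorem solve_rec_sat : ∀ (list : List (String × String)) (s1 s2 : List String),
    PreStrict list s1 s2 → (solve_rec list s1 s2 = true ↔ Sat list s1 s2) := by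
  intro list s1 s2
  induction list, s1, s2 using solve_rec.induct with
  | case1 l s1 s2 hl =>
    intro hpre
    have hnil : l = [] := List.length_eq_zero_iff.mp hl
    subst hnil
    rw [solve_rec]
    simpa using Sat_nil hpre.2
  | case2 l s1 s2 hn hnone =>
    intro hpre
    have hns := aPass_none l s1 s2 [] hnone
    rw [List.append_nil] at hns
    have hsr : solve_rec l s1 s2 = false := by
      rw [solve_rec, dif_neg hn]
      split
      · rfl
      · rename_i nl' t1' t2' heq
        rw [hnone] at heq
        cases heq
    simp [hsr, hns]
  | case3 l s1 s2 hn nl t1 t2 hsome hlen p ih =>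
    intro hpre
    have hnil : l ≠ [] := fun h' => hn (by simp [h'])
    obtain ⟨ht1, ht2, hfree⟩ :=
      aPass_frozen l s1 s2 [] nl t1 t2 hsome (by simpa using hlen.symm)
    subst t1; subst t2
    have hpmem : p ∈ l := List.getLast_mem hnil
    have hfp := hfree p hpmem
    have hab : p.1 ≠ p.2 := hpre.1 p hpmem
    have hpre' : PreStrict l.dropLast (PySem.Set.add s1 p.1) (PySem.Set.add s2 p.2) := by
      constructor
      · exact fun q hq => hpre.1 q ((List.dropLast_sublist l).subset hq)
      · intro v hv hv2
        rcases (PySem.Set.mem_add _ _ _).mp hv with hv' | hv' <;>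
          rcases (PySem.Set.mem_add _ _ _).mp hv2 with hv2' | hv2'
        · exact hpre.2 v hv' hv2'
        · exact hfp.2.2.1 (hv2' ▸ hv')
        · exact hfp.2.1 (hv' ▸ hv2')
        · exact hab (hv'.symm.trans hv2')
    have hiff : Sat l.dropLast (PySem.Set.add s1 p.1) (PySem.Set.add s2 p.2) ↔ Sat l s1 s2 := by
      constructor
      · rintro ⟨c, hE, hs1, hs2⟩
        refine ⟨c, ?_, fun v hv => hs1 v ((PySem.Set.mem_add _ _ _).mpr (Or.inl hv)),
          fun v hv => hs2 v ((PySem.Set.mem_add _ _ _).mpr (Or.inl hv))⟩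
        intro q hq
        rcases List.mem_append.mp ((List.dropLast_append_getLast hnil) ▸ hq) with hq' | hq'
        · exact hE q hq'
        · have hq'' : q = p := by simpa using hq'
          rw [hq'']
          have hx1 := hs1 p.1 ((PySem.Set.mem_add _ _ _).mpr (Or.inr rfl))
          have hx2 := hs2 p.2 ((PySem.Set.mem_add _ _ _).mpr (Or.inr rfl))
          simp [hx1, hx2]
      · intro hs
        have hep : (p.1, p.2) ∈ l := by simpa using hpmem
        have := Sat_seed hep (by simpa using hfree) hs
        exact Sat_mono (fun q hq => (List.dropLast_sublist l).subset hq) this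
    have hsr : solve_rec l s1 s2 =
        solve_rec l.dropLast (PySem.Set.add s1 p.1) (PySem.Set.add s2 p.2) := by
      rw [solve_rec, dif_neg hn]
      split
      · rename_i heq
        rw [hsome] at heq
        cases heq
      · rename_i nl' t1' t2' heq
        rw [hsome] at heq
        cases heq
        rw [if_pos hlen]
    rw [hsr]
    exact (ih hpre').trans hiff
  | case4 l s1 s2 hn nl t1 t2 hsome hlen hnl ih =>
    intro hpre
    have hmem := aPass_mem l s1 s2 [] nl t1 t2 hsome
    rw [List.append_nil] at hmem
    have hpre' : PreStrict nl t1 t2 :=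
      ⟨fun q hq => hpre.1 q (hmem q hq), aPass_disjoint l s1 s2 [] nl t1 t2 hsome hpre.2⟩
    have hiff := aPass_sat l s1 s2 [] nl t1 t2 hsome
    rw [List.append_nil] at hiff
    have hsr : solve_rec l s1 s2 = solve_rec nl t1 t2 := by
      rw [solve_rec, dif_neg hn]
      split
      · rename_i heq
        rw [hsome] at heq
        cases heq
      · rename_i nl' t1' t2' heq
        rw [hsome] at heq
        cases heq
        rw [if_neg hlen, if_pos hnl]
    rw [hsr]
    exact (ih hpre').trans hiff.symm
  | case5 l s1 s2 hn nl t1 t2 hsome hlen hnl =>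
    intro hpre
    have hnil : nl = [] := by simpa using hnl
    subst hnil
    have hiff := aPass_sat l s1 s2 [] [] t1 t2 hsome
    rw [List.append_nil] at hiff
    have hsat := Sat_nil (aPass_disjoint l s1 s2 [] [] t1 t2 hsome hpre.2)
    have hsr : solve_rec l s1 s2 = true := by
      rw [solve_rec, dif_neg hn]
      split
      · rename_i heq
        rw [hsome] at heq
        cases heq
      · rename_i nl' t1' t2' heq
        rw [hsome] at heq
        cases heq
        rw [if_neg hlen, if_neg (by simp : ¬ (([] : List (String × String)) ≠ []))]
    simp [hsr, hiff.mpr hsat]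

-- ---- B side ----
def ColOK (c : String → Bool) (g : List String × List String) (x : Bool) : Prop :=
  (∀ v ∈ g.1, c v = x) ∧ (∀ v ∈ g.2, c v = !x)
def GrpOK (c : String → Bool) (g : List String × List String) : Prop := ∃ x, ColOK c g x
def GOK (c : String → Bool) (gl : List (List String × List String)) : Prop := ∀ g ∈ gl, GrpOK c g
def InG (v : String) (g : List String × List String) : Prop := v ∈ g.1 ∨ v ∈ g.2
def WFg (gl : List (List String × List String)) : Prop :=
  (∀ i (h : i < gl.length), ∀ v, v ∈ (gl[i]).1 → v ∉ (gl[i]).2) ∧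
  (∀ i j (hi : i < gl.length) (hj : j < gl.length), i ≠ j → ∀ v, InG v gl[i] → ¬ InG v gl[j])

theorem bool_ne_iff {x y : Bool} : x ≠ y ↔ y = !x := by cases x <;> cases y <;> simp
theorem bool_ne_iff' {x y : Bool} : x ≠ y ↔ x = !y := by cases x <;> cases y <;> simp

theorem GOK_iff_index {c : String → Bool} {gl : List (List String × List String)} :
    GOK c gl ↔ ∀ i (h : i < gl.length), GrpOK c (gl[i]) := by
  constructor
  · intro h i hi; exact h _ (gl.getElem_mem hi)
  · intro h g hg
    obtain ⟨i, hi, rfl⟩ := List.mem_iff_getElem.mp hg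
    exact h i hi

theorem GOK_split {c : String → Bool} {gl : List (List String × List String)} {i : Nat}
    (hi : i < gl.length) :
    GOK c gl ↔ (GrpOK c (gl[i]) ∧ ∀ k, ∀ hk : k < gl.length, k ≠ i → GrpOK c (gl[k])) := by
  rw [GOK_iff_index]
  constructor
  · intro h; exact ⟨h i hi, fun k hk _ => h k hk⟩
  · rintro ⟨h1, h2⟩ k hk
    by_cases hki : k = i
    · subst hki; exact h1
    · exact h2 k hk hki

theorem GOK_split2 {c : String → Bool} {gl : List (List String × List String)} {i j : Nat}
    (hi : i < gl.length) (hj : j < gl.length) (hij : i ≠ j) :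
    GOK c gl ↔ (GrpOK c (gl[i]) ∧ GrpOK c (gl[j]) ∧
      ∀ k, ∀ hk : k < gl.length, k ≠ i → k ≠ j → GrpOK c (gl[k])) := by
  rw [GOK_iff_index]
  constructor
  · intro h; exact ⟨h i hi, h j hj, fun k hk _ _ => h k hk⟩
  · rintro ⟨h1, h2, h3⟩ k hk
    by_cases hki : k = i
    · subst hki; exact h1
    · by_cases hkj : k = j
      · subst hkj; exact h2
      · exact h3 k hk hki hkj

theorem GOK_set_iff {c : String → Bool} {gl : List (List String × List String)} {i : Nat}
    {m : List String × List String} (hi : i < gl.length) :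
    GOK c (gl.set i m) ↔ (GrpOK c m ∧ ∀ k, ∀ hk : k < gl.length, k ≠ i → GrpOK c (gl[k])) := by
  rw [GOK_iff_index]
  constructor
  · intro h
    refine ⟨?_, ?_⟩
    · have := h i (by rw [List.length_set]; exact hi)
      rwa [List.getElem_set, if_pos rfl] at this
    · intro k hk hki
      have := h k (by rw [List.length_set]; exact hk)
      rwa [List.getElem_set, if_neg (fun h' => hki h'.symm)] at this
  · rintro ⟨h1, h2⟩ k hk
    rw [List.length_set] at hk
    rw [List.getElem_set]
    by_cases hik : i = k
    · rwa [if_pos hik]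
    · rw [if_neg hik]; exact h2 k hk (fun h' => hik h'.symm)

theorem getElem_setErase {α : Type} (gl : List α) (m : α) (i j k : Nat)
    (hj : j < gl.length) (hk : k < ((gl.set i m).eraseIdx j).length)
    (hk' : (if k < j then k else k + 1) < gl.length) :
    ((gl.set i m).eraseIdx j)[k] =
      if i = (if k < j then k else k + 1) then m
      else gl[(if k < j then k else k + 1)]'hk' := by
  rcases Nat.lt_or_ge k j with hkj | hkj
  · simp only [if_pos hkj] at hk' ⊢
    rw [List.getElem_eraseIdx, dif_pos hkj, List.getElem_set]
  · have hn : ¬ k < j := Nat.not_lt.mpr hkj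
    simp only [if_neg hn] at hk' ⊢
    rw [List.getElem_eraseIdx, dif_neg hn, List.getElem_set]

theorem length_setErase {α : Type} (gl : List α) (m : α) (i j : Nat) (hj : j < gl.length) :
    ((gl.set i m).eraseIdx j).length = gl.length - 1 := by
  rw [List.length_eraseIdx, List.length_set]
  simp [hj]

theorem mem_setErase_m {α : Type} {gl : List α} {m : α} {i j : Nat}
    (hi : i < gl.length) (hj : j < gl.length) (hij : i ≠ j) :
    m ∈ (gl.set i m).eraseIdx j := by
  have hlen := length_setErase gl m i j hj
  rcases Nat.lt_or_ge i j with hlt | hge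
  · refine List.mem_iff_getElem.mpr ⟨i, by omega, ?_⟩
    rw [getElem_setErase gl m i j i hj (by omega) (by simp only [if_pos hlt]; omega)]
    simp only [if_pos hlt]
    simp
  · have hji : j < i := by omega
    refine List.mem_iff_getElem.mpr ⟨i - 1, by omega, ?_⟩
    have hc : ¬ (i - 1 < j) := by omega
    rw [getElem_setErase gl m i j (i - 1) hj (by omega) (by simp only [if_neg hc]; omega)]
    simp only [if_neg hc]
    rw [if_pos (by omega)]

theorem mem_setErase_k {α : Type} {gl : List α} {m : α} {i j k : Nat}
    (hj : j < gl.length) (hk : k < gl.length) (hki : k ≠ i) (hkj : k ≠ j) :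
    gl[k] ∈ (gl.set i m).eraseIdx j := by
  have hlen := length_setErase gl m i j hj
  rcases Nat.lt_or_ge k j with hlt | hge
  · refine List.mem_iff_getElem.mpr ⟨k, by omega, ?_⟩
    rw [getElem_setErase gl m i j k hj (by omega) (by simp only [if_pos hlt]; omega)]
    simp only [if_pos hlt]
    rw [if_neg (fun h' => hki h'.symm)]
  · have hjk : j < k := by omega
    refine List.mem_iff_getElem.mpr ⟨k - 1, by omega, ?_⟩
    have hc : ¬ (k - 1 < j) := by omega
    rw [getElem_setErase gl m i j (k - 1) hj (by omega) (by simp only [if_neg hc]; omega)]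
    simp only [if_neg hc]
    have hkk : k - 1 + 1 = k := by omega
    simp only [hkk]
    rw [if_neg (fun h' => hki h'.symm)]

theorem GOK_setErase_iff {c : String → Bool} {gl : List (List String × List String)} {i j : Nat}
    {m : List String × List String} (hi : i < gl.length) (hj : j < gl.length) (hij : i ≠ j) :
    GOK c ((gl.set i m).eraseIdx j) ↔
      (GrpOK c m ∧ ∀ k, ∀ hk : k < gl.length, k ≠ i → k ≠ j → GrpOK c (gl[k])) := by
  have hlen := length_setErase gl m i j hj
  constructor
  · intro h
    refine ⟨h m (mem_setErase_m hi hj hij), ?_⟩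
    intro k hk hki hkj
    exact h _ (mem_setErase_k hj hk hki hkj)
  · rintro ⟨h1, h2⟩
    rw [GOK_iff_index]
    intro k hk
    have hk' : (if k < j then k else k + 1) < gl.length := by rw [hlen] at hk; split <;> omega
    rw [getElem_setErase gl m i j k hj hk hk']
    by_cases hik : i = (if k < j then k else k + 1)
    · rw [if_pos hik]; exact h1
    · rw [if_neg hik]
      exact h2 _ hk' (fun h' => hik h'.symm) (by rw [hlen] at hk; split <;> omega)

theorem ColOK_union_keep {c : String → Bool} {g1 g2 : List String × List String} {x : Bool} :
    ColOK c (PySem.Set.union g1.1 g2.1, PySem.Set.union g1.2 g2.2) x ↔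
      (ColOK c g1 x ∧ ColOK c g2 x) := by
  unfold ColOK
  simp only [PySem.Set.mem_union]
  constructor
  · rintro ⟨h1, h2⟩
    exact ⟨⟨fun v hv => h1 v (Or.inl hv), fun v hv => h2 v (Or.inl hv)⟩,
           ⟨fun v hv => h1 v (Or.inr hv), fun v hv => h2 v (Or.inr hv)⟩⟩
  · rintro ⟨⟨a1, a2⟩, ⟨b1, b2⟩⟩
    exact ⟨fun v hv => hv.elim (a1 v) (b1 v), fun v hv => hv.elim (a2 v) (b2 v)⟩

theorem ColOK_union_swap {c : String → Bool} {g1 g2 : List String × List String} {x : Bool} :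
    ColOK c (PySem.Set.union g1.1 g2.2, PySem.Set.union g1.2 g2.1) x ↔
      (ColOK c g1 x ∧ ColOK c g2 (!x)) := by
  unfold ColOK
  simp only [PySem.Set.mem_union, Bool.not_not]
  constructor
  · rintro ⟨h1, h2⟩
    exact ⟨⟨fun v hv => h1 v (Or.inl hv), fun v hv => h2 v (Or.inl hv)⟩,
           ⟨fun v hv => h2 v (Or.inr hv), fun v hv => h1 v (Or.inr hv)⟩⟩
  · rintro ⟨⟨a1, a2⟩, ⟨b1, b2⟩⟩
    exact ⟨fun v hv => hv.elim (a1 v) (b2 v), fun v hv => hv.elim (a2 v) (b1 v)⟩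

theorem GrpOK_pair {c : String → Bool} {a b : String} :
    GrpOK c ([a], [b]) ↔ c a ≠ c b := by
  constructor
  · rintro ⟨x, h1, h2⟩
    have ha := h1 a (by simp)
    have hb := h2 b (by simp)
    rw [ha, hb]
    simp
  · intro h
    refine ⟨c a, ?_, ?_⟩
    · intro v hv; simp at hv; rw [hv]
    · intro v hv; simp at hv; rw [hv, ← bool_ne_iff.mp h]

theorem GrpOK_addR {c : String → Bool} {g : List String × List String} {a b : String}
    (ha : a ∈ g.1) :
    GrpOK c (g.1, PySem.Set.add g.2 b) ↔ (GrpOK c g ∧ c b = !(c a)) := by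
  constructor
  · rintro ⟨x, h1, h2⟩
    have hca : c a = x := h1 a ha
    have hcb : c b = !x := h2 b ((PySem.Set.mem_add _ _ _).mpr (Or.inr rfl))
    exact ⟨⟨x, h1, fun v hv => h2 v ((PySem.Set.mem_add _ _ _).mpr (Or.inl hv))⟩,
           by rw [hcb, hca]⟩
  · rintro ⟨⟨x, h1, h2⟩, hb⟩
    refine ⟨x, h1, ?_⟩
    intro v hv
    rcases (PySem.Set.mem_add _ _ _).mp hv with hv' | hv'
    · exact h2 v hv'
    · rw [hv', hb, h1 a ha]

theorem GrpOK_addL {c : String → Bool} {g : List String × List String} {a b : String}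
    (ha : a ∈ g.2) :
    GrpOK c (PySem.Set.add g.1 b, g.2) ↔ (GrpOK c g ∧ c b = !(c a)) := by
  constructor
  · rintro ⟨x, h1, h2⟩
    have hca : c a = !x := h2 a ha
    have hcb : c b = x := h1 b ((PySem.Set.mem_add _ _ _).mpr (Or.inr rfl))
    exact ⟨⟨x, fun v hv => h1 v ((PySem.Set.mem_add _ _ _).mpr (Or.inl hv)), h2⟩,
           by rw [hcb, hca, Bool.not_not]⟩
  · rintro ⟨⟨x, h1, h2⟩, hb⟩
    refine ⟨x, ?_, h2⟩
    intro v hv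
    rcases (PySem.Set.mem_add _ _ _).mp hv with hv' | hv'
    · exact h1 v hv'
    · rw [hv', hb, h2 a ha, Bool.not_not]

theorem WFg_set_fresh {gl : List (List String × List String)} {i : Nat}
    {g' : List String × List String} {w : String}
    (hi : i < gl.length) (hwf : WFg gl)
    (hsub : ∀ v, InG v g' → InG v (gl[i]) ∨ v = w)
    (hw : ∀ g ∈ gl, ¬ InG w g)
    (hwithin : ∀ v, v ∈ g'.1 → v ∉ g'.2) :
    WFg (gl.set i g') := by
  obtain ⟨hw1, hw2⟩ := hwf
  constructor
  · intro k hk v hv1 hv2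
    rw [List.length_set] at hk
    rw [List.getElem_set] at hv1 hv2
    by_cases hki : i = k
    · rw [if_pos hki] at hv1 hv2
      exact hwithin v hv1 hv2
    · rw [if_neg hki] at hv1 hv2
      exact hw1 k hk v hv1 hv2
  · intro k1 k2 hk1 hk2 hne v hv1 hv2
    rw [List.length_set] at hk1 hk2
    rw [List.getElem_set] at hv1 hv2
    by_cases h1 : i = k1 <;> by_cases h2 : i = k2
    · exact hne (h1 ▸ h2 ▸ rfl)
    · rw [if_pos h1] at hv1
      rw [if_neg h2] at hv2
      rcases hsub v hv1 with h' | h'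
      · exact hw2 i k2 hi hk2 (fun he => h2 he) v h' hv2
      · exact hw (gl[k2]) (gl.getElem_mem hk2) (h' ▸ hv2)
    · rw [if_neg h1] at hv1
      rw [if_pos h2] at hv2
      rcases hsub v hv2 with h' | h'
      · exact hw2 k1 i hk1 hi (fun he => h1 he.symm) v hv1 h'
      · exact hw (gl[k1]) (gl.getElem_mem hk1) (h' ▸ hv1)
    · rw [if_neg h1] at hv1
      rw [if_neg h2] at hv2
      exact hw2 k1 k2 hk1 hk2 hne v hv1 hv2

theorem WFg_setErase {gl : List (List String × List String)} {i j : Nat}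
    {m : List String × List String}
    (hi : i < gl.length) (hj : j < gl.length) (hij : i ≠ j) (hwf : WFg gl)
    (hsub : ∀ v, InG v m → InG v (gl[i]) ∨ InG v (gl[j]))
    (hwithin : ∀ v, v ∈ m.1 → v ∉ m.2) :
    WFg ((gl.set i m).eraseIdx j) := by
  obtain ⟨hw1, hw2⟩ := hwf
  have hlen := length_setErase gl m i j hj
  constructor
  · intro k hk v hv1 hv2
    have hk' : (if k < j then k else k + 1) < gl.length := by rw [hlen] at hk; split <;> omega
    rw [getElem_setErase gl m i j k hj hk hk'] at hv1 hv2
    by_cases hφ : i = (if k < j then k else k + 1)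
    · rw [if_pos hφ] at hv1 hv2
      exact hwithin v hv1 hv2
    · rw [if_neg hφ] at hv1 hv2
      exact hw1 _ hk' v hv1 hv2
  · intro k1 k2 hk1 hk2 hne v hv1 hv2
    have hk1' : (if k1 < j then k1 else k1 + 1) < gl.length := by rw [hlen] at hk1; split <;> omega
    have hk2' : (if k2 < j then k2 else k2 + 1) < gl.length := by rw [hlen] at hk2; split <;> omega
    have hφne : (if k1 < j then k1 else k1 + 1) ≠ (if k2 < j then k2 else k2 + 1) := by
      split <;> split <;> omega
    have hφ1j : (if k1 < j then k1 else k1 + 1) ≠ j := by rw [hlen] at hk1; split <;> omega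
    have hφ2j : (if k2 < j then k2 else k2 + 1) ≠ j := by rw [hlen] at hk2; split <;> omega
    rw [getElem_setErase gl m i j k1 hj hk1 hk1'] at hv1
    rw [getElem_setErase gl m i j k2 hj hk2 hk2'] at hv2
    by_cases h1 : i = (if k1 < j then k1 else k1 + 1) <;>
      by_cases h2 : i = (if k2 < j then k2 else k2 + 1)
    · exact hφne (h1 ▸ h2 ▸ rfl)
    · rw [if_pos h1] at hv1
      rw [if_neg h2] at hv2
      rcases hsub v hv1 with h' | h'
      · exact hw2 i _ hi hk2' (fun he => h2 he) v h' hv2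
      · exact hw2 j _ hj hk2' (fun he => hφ2j he.symm) v h' hv2
    · rw [if_neg h1] at hv1
      rw [if_pos h2] at hv2
      rcases hsub v hv2 with h' | h'
      · exact hw2 _ i hk1' hi (fun he => h1 he.symm) v hv1 h'
      · exact hw2 _ j hk1' hj hφ1j v hv1 h'
    · rw [if_neg h1] at hv1
      rw [if_neg h2] at hv2
      exact hw2 _ _ hk1' hk2' hφne v hv1 hv2

theorem bFind_none {gl : List (List String × List String)} {v : String} :
    bFind gl v = none → ∀ g ∈ gl, ¬ InG v g := by
  induction gl with
  | nil => intro _ g hg; simp at hg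
  | cons g0 gs ih =>
    obtain ⟨l, r⟩ := g0
    intro h g hg
    simp only [bFind] at h
    split_ifs at h with h1 h2
    · rw [Option.map_eq_none_iff] at h
      rcases List.mem_cons.mp hg with hg' | hg'
      · rw [hg']
        rintro (hv | hv)
        · exact h1 hv
        · exact h2 hv
      · exact ih h g hg'

theorem bFind_some {gl : List (List String × List String)} {v : String} {i : Nat} {s : Bool} :
    bFind gl v = some (i, s) →
    ∃ h : i < gl.length, (if s then v ∈ (gl[i]).1 else v ∈ (gl[i]).2) := by
  induction gl generalizing i s with
  | nil => intro h; simp [bFind] at h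
  | cons g0 gs ih =>
    obtain ⟨l, r⟩ := g0
    intro h
    simp only [bFind] at h
    split_ifs at h with h1 h2
    · cases h
      exact ⟨by simp, by simpa using h1⟩
    · cases h
      exact ⟨by simp, by simpa using h2⟩
    · rw [Option.map_eq_some_iff] at h
      obtain ⟨⟨i', s'⟩, hfind, heq⟩ := h
      simp only [Prod.mk.injEq] at heq
      obtain ⟨hi', hs'⟩ := heq
      subst hs'
      obtain ⟨hlt, hmem⟩ := ih hfind
      refine ⟨by simp; omega, ?_⟩
      have : i = i' + 1 := hi'.symm
      subst this
      simpa using hmem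

theorem exists_GOK {gl : List (List String × List String)} (hwf : WFg gl) : ∃ c, GOK c gl := by
  classical
  refine ⟨fun v => decide (∃ g ∈ gl, v ∈ g.1), ?_⟩
  intro g hg
  refine ⟨true, ?_, ?_⟩
  · intro v hv
    beta_reduce
    simp only [decide_eq_true_eq]
    exact ⟨g, hg, hv⟩
  · intro v hv
    beta_reduce
    simp only [Bool.not_true, decide_eq_false_iff_not]
    rintro ⟨g', hg', hv'⟩
    obtain ⟨i, hi, hgi⟩ := List.mem_iff_getElem.mp hg
    obtain ⟨i', hi', hgi'⟩ := List.mem_iff_getElem.mp hg'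
    rw [← hgi] at hv
    rw [← hgi'] at hv'
    by_cases hii : i = i'
    · subst hii
      exact hwf.1 i hi v hv' hv
    · exact hwf.2 i' i hi' hi (fun h' => hii h'.symm) v (Or.inl hv') (Or.inr hv)

theorem bStep_none {gl : List (List String × List String)} {a b : String}
    (h : bStep gl a b = none) : ∀ c, GOK c gl → c a = c b := by
  intro c hgok
  unfold bStep at h
  split at h
  · cases h
  · cases h
  · cases h
  · rename_i i sa j sb hfa hfb
    split_ifs at h with hij hsab
    obtain ⟨hi, hma⟩ := bFind_some hfa
    obtain ⟨hj, hmb⟩ := bFind_some hfb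
    subst hij; subst hsab
    obtain ⟨x, h1, h2⟩ := hgok _ (gl.getElem_mem hi)
    cases sa
    · simp at hma hmb
      rw [h2 a hma, h2 b hmb]
    · simp at hma hmb
      rw [h1 a hma, h1 b hmb]

theorem bStep_some {gl gl' : List (List String × List String)} {a b : String}
    (h : bStep gl a b = some gl') (hab : a ≠ b) (hwf : WFg gl) :
    WFg gl' ∧ (∀ c, GOK c gl' ↔ (GOK c gl ∧ c a ≠ c b)) := by
  unfold bStep at h
  split at h
  -- case 1: both vertices fresh, append a new group
  case h_1 hfa hfb =>
    have ha := bFind_none hfa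
    have hb := bFind_none hfb
    cases h
    constructor
    · constructor
      · intro k hk v hv1 hv2
        rw [List.length_append, List.length_singleton] at hk
        rcases Nat.lt_or_ge k gl.length with hlt | hge
        · rw [List.getElem_append_left hlt] at hv1 hv2
          exact hwf.1 k hlt v hv1 hv2
        · have hkeq : k = gl.length := by omega
          subst hkeq
          rw [List.getElem_append_right (by omega)] at hv1 hv2
          simp at hv1 hv2
          exact hab (hv1.symm.trans hv2)
      · intro k1 k2 hk1 hk2 hne v hv1 hv2
        rw [List.length_append, List.length_singleton] at hk1 hk2
        by_cases c1 : k1 < gl.length <;> by_cases c2 : k2 < gl.length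
        · rw [List.getElem_append_left c1] at hv1
          rw [List.getElem_append_left c2] at hv2
          exact hwf.2 k1 k2 c1 c2 hne v hv1 hv2
        · have hkeq : k2 = gl.length := by omega
          subst hkeq
          rw [List.getElem_append_left c1] at hv1
          rw [List.getElem_append_right (by omega)] at hv2
          simp at hv2
          unfold InG at hv2
          simp at hv2
          rcases hv2 with h' | h'
          · exact ha _ (gl.getElem_mem c1) (h' ▸ hv1)
          · exact hb _ (gl.getElem_mem c1) (h' ▸ hv1)
        · have hkeq : k1 = gl.length := by omega
          subst hkeq
          rw [List.getElem_append_left c2] at hv2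
          rw [List.getElem_append_right (by omega)] at hv1
          simp at hv1
          unfold InG at hv1
          simp at hv1
          rcases hv1 with h' | h'
          · exact ha _ (gl.getElem_mem c2) (h' ▸ hv2)
          · exact hb _ (gl.getElem_mem c2) (h' ▸ hv2)
        · exact hne (by omega)
    · intro c
      constructor
      · intro hg
        refine ⟨fun g hg' => hg g (List.mem_append_left _ hg'), ?_⟩
        exact GrpOK_pair.mp (hg _ (List.mem_append_right _ (by simp)))
      · rintro ⟨h1, hne⟩ g hg'
        rcases List.mem_append.mp hg' with h' | h'
        · exact h1 g h'
        · simp at h'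
          rw [h']
          exact GrpOK_pair.mpr hne
  -- case 2: a in a group, b fresh
  case h_2 i sa hfa hfb =>
    obtain ⟨hi, hma⟩ := bFind_some hfa
    have hb := bFind_none hfb
    rw [List.getD_eq_getElem _ _ hi] at h
    cases h
    cases sa
    · simp at hma
      constructor
      · refine WFg_set_fresh hi hwf ?_ hb ?_
        · rintro v (hv | hv)
          · rcases (PySem.Set.mem_add _ _ _).mp hv with hv' | hv'
            · exact Or.inl (Or.inl hv')
            · exact Or.inr hv'
          · exact Or.inl (Or.inr hv)
        · intro v hv hv2
          rcases (PySem.Set.mem_add _ _ _).mp hv with hv' | hv'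
          · exact hwf.1 i hi v hv' hv2
          · exact hb _ (gl.getElem_mem hi) (hv' ▸ Or.inr hv2)
      · intro c
        rw [GOK_set_iff hi, if_neg Bool.false_ne_true]
        rw [GrpOK_addL hma, GOK_split (c := c) hi, bool_ne_iff]
        tauto
    · simp at hma
      constructor
      · refine WFg_set_fresh hi hwf ?_ hb ?_
        · rintro v (hv | hv)
          · exact Or.inl (Or.inl hv)
          · rcases (PySem.Set.mem_add _ _ _).mp hv with hv' | hv'
            · exact Or.inl (Or.inr hv')
            · exact Or.inr hv'
        · intro v hv hv2
          rcases (PySem.Set.mem_add _ _ _).mp hv2 with hv' | hv'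
          · exact hwf.1 i hi v hv hv'
          · exact hb _ (gl.getElem_mem hi) (hv' ▸ Or.inl hv)
      · intro c
        rw [GOK_set_iff hi, if_pos rfl]
        rw [GrpOK_addR hma, GOK_split (c := c) hi, bool_ne_iff]
        tauto
  -- case 3: b in a group, a fresh
  case h_3 j sb hfa hfb =>
    obtain ⟨hj, hmb⟩ := bFind_some hfb
    have ha := bFind_none hfa
    rw [List.getD_eq_getElem _ _ hj] at h
    cases h
    cases sb
    · simp at hmb
      constructor
      · refine WFg_set_fresh hj hwf ?_ ha ?_
        · rintro v (hv | hv)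
          · rcases (PySem.Set.mem_add _ _ _).mp hv with hv' | hv'
            · exact Or.inl (Or.inl hv')
            · exact Or.inr hv'
          · exact Or.inl (Or.inr hv)
        · intro v hv hv2
          rcases (PySem.Set.mem_add _ _ _).mp hv with hv' | hv'
          · exact hwf.1 j hj v hv' hv2
          · exact ha _ (gl.getElem_mem hj) (hv' ▸ Or.inr hv2)
      · intro c
        rw [GOK_set_iff hj, if_neg Bool.false_ne_true]
        rw [GrpOK_addL hmb, GOK_split (c := c) hj, bool_ne_iff']
        tauto
    · simp at hmb
      constructor
      · refine WFg_set_fresh hj hwf ?_ ha ?_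
        · rintro v (hv | hv)
          · exact Or.inl (Or.inl hv)
          · rcases (PySem.Set.mem_add _ _ _).mp hv with hv' | hv'
            · exact Or.inl (Or.inr hv')
            · exact Or.inr hv'
        · intro v hv hv2
          rcases (PySem.Set.mem_add _ _ _).mp hv2 with hv' | hv'
          · exact hwf.1 j hj v hv hv'
          · exact ha _ (gl.getElem_mem hj) (hv' ▸ Or.inl hv)
      · intro c
        rw [GOK_set_iff hj, if_pos rfl]
        rw [GrpOK_addR hmb, GOK_split (c := c) hj, bool_ne_iff']
        tauto
  -- case 4: both found
  case h_4 i sa j sb hfa hfb =>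
    obtain ⟨hi, hma⟩ := bFind_some hfa
    obtain ⟨hj, hmb⟩ := bFind_some hfb
    rw [List.getD_eq_getElem _ _ hi, List.getD_eq_getElem _ _ hj] at h
    split_ifs at h with hij hsab hss
    · -- same group, opposite sides: state unchanged
      cases h
      subst hij
      refine ⟨hwf, fun c => ?_⟩
      constructor
      · intro hg
        refine ⟨hg, ?_⟩
        obtain ⟨x, h1, h2⟩ := hg _ (gl.getElem_mem hi)
        cases sa <;> cases sb <;> simp at hsab hma hmb <;>
          first
          | (rw [h2 a hma, h1 b hmb]; cases x <;> simp)
          | (rw [h1 a hma, h2 b hmb]; cases x <;> simp)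
      · rintro ⟨hg, _⟩
        exact hg
    · -- merge with swapped orientation (same sides)
      cases h
      subst hss
      cases sa <;> simp at hma hmb
      · refine ⟨WFg_setErase hi hj hij hwf ?_ ?_, fun c => ?_⟩
        · rintro v (hv | hv) <;> rcases (PySem.Set.mem_union _ _ _).mp hv with hv' | hv'
          · exact Or.inl (Or.inl hv')
          · exact Or.inr (Or.inr hv')
          · exact Or.inl (Or.inr hv')
          · exact Or.inr (Or.inl hv')
        · intro v hv hv2
          rcases (PySem.Set.mem_union _ _ _).mp hv with hv' | hv' <;>
            rcases (PySem.Set.mem_union _ _ _).mp hv2 with hv2' | hv2'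
          · exact hwf.1 i hi v hv' hv2'
          · exact hwf.2 i j hi hj hij v (Or.inl hv') (Or.inl hv2')
          · exact hwf.2 i j hi hj hij v (Or.inr hv2') (Or.inr hv')
          · exact hwf.1 j hj v hv2' hv'
        · rw [GOK_setErase_iff hi hj hij, GOK_split2 (c := c) hi hj hij]
          have hm : GrpOK c (PySem.Set.union (gl[i]).1 (gl[j]).2,
              PySem.Set.union (gl[i]).2 (gl[j]).1) ↔
              (GrpOK c (gl[i]) ∧ GrpOK c (gl[j]) ∧ c a ≠ c b) := by
            constructor
            · rintro ⟨x, hcol⟩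
              obtain ⟨hci, hcj⟩ := ColOK_union_swap.mp hcol
              refine ⟨⟨x, hci⟩, ⟨!x, hcj⟩, ?_⟩
              rw [hci.2 a hma, hcj.2 b hmb]
              cases x <;> simp
            · rintro ⟨⟨x, hci⟩, ⟨y, hcj⟩, hne⟩
              have hca := hci.2 a hma
              have hcb := hcj.2 b hmb
              have hyx : y = !x := by
                rw [hca, hcb] at hne
                cases x <;> cases y <;> simp_all
              subst hyx
              exact ⟨x, ColOK_union_swap.mpr ⟨hci, hcj⟩⟩
          rw [hm]
          tauto
      · refine ⟨WFg_setErase hi hj hij hwf ?_ ?_, fun c => ?_⟩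
        · rintro v (hv | hv) <;> rcases (PySem.Set.mem_union _ _ _).mp hv with hv' | hv'
          · exact Or.inl (Or.inl hv')
          · exact Or.inr (Or.inr hv')
          · exact Or.inl (Or.inr hv')
          · exact Or.inr (Or.inl hv')
        · intro v hv hv2
          rcases (PySem.Set.mem_union _ _ _).mp hv with hv' | hv' <;>
            rcases (PySem.Set.mem_union _ _ _).mp hv2 with hv2' | hv2'
          · exact hwf.1 i hi v hv' hv2'
          · exact hwf.2 i j hi hj hij v (Or.inl hv') (Or.inl hv2')
          · exact hwf.2 i j hi hj hij v (Or.inr hv2') (Or.inr hv')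
          · exact hwf.1 j hj v hv2' hv'
        · rw [GOK_setErase_iff hi hj hij, GOK_split2 (c := c) hi hj hij]
          have hm : GrpOK c (PySem.Set.union (gl[i]).1 (gl[j]).2,
              PySem.Set.union (gl[i]).2 (gl[j]).1) ↔
              (GrpOK c (gl[i]) ∧ GrpOK c (gl[j]) ∧ c a ≠ c b) := by
            constructor
            · rintro ⟨x, hcol⟩
              obtain ⟨hci, hcj⟩ := ColOK_union_swap.mp hcol
              refine ⟨⟨x, hci⟩, ⟨!x, hcj⟩, ?_⟩
              rw [hci.1 a hma, hcj.1 b hmb]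
              cases x <;> simp
            · rintro ⟨⟨x, hci⟩, ⟨y, hcj⟩, hne⟩
              have hca := hci.1 a hma
              have hcb := hcj.1 b hmb
              have hyx : y = !x := by
                rw [hca, hcb] at hne
                cases x <;> cases y <;> simp_all
              subst hyx
              exact ⟨x, ColOK_union_swap.mpr ⟨hci, hcj⟩⟩
          rw [hm]
          tauto
    · -- merge keeping orientation (opposite sides)
      cases h
      cases sa <;> cases sb <;> simp at hma hmb
      · exact absurd rfl hss
      · refine ⟨WFg_setErase hi hj hij hwf ?_ ?_, fun c => ?_⟩
        · rintro v (hv | hv) <;> rcases (PySem.Set.mem_union _ _ _).mp hv with hv' | hv'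
          · exact Or.inl (Or.inl hv')
          · exact Or.inr (Or.inl hv')
          · exact Or.inl (Or.inr hv')
          · exact Or.inr (Or.inr hv')
        · intro v hv hv2
          rcases (PySem.Set.mem_union _ _ _).mp hv with hv' | hv' <;>
            rcases (PySem.Set.mem_union _ _ _).mp hv2 with hv2' | hv2'
          · exact hwf.1 i hi v hv' hv2'
          · exact hwf.2 i j hi hj hij v (Or.inl hv') (Or.inr hv2')
          · exact hwf.2 i j hi hj hij v (Or.inr hv2') (Or.inl hv')
          · exact hwf.1 j hj v hv' hv2'
        · rw [GOK_setErase_iff hi hj hij, GOK_split2 (c := c) hi hj hij]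
          have hm : GrpOK c (PySem.Set.union (gl[i]).1 (gl[j]).1,
              PySem.Set.union (gl[i]).2 (gl[j]).2) ↔
              (GrpOK c (gl[i]) ∧ GrpOK c (gl[j]) ∧ c a ≠ c b) := by
            constructor
            · rintro ⟨x, hcol⟩
              obtain ⟨hci, hcj⟩ := ColOK_union_keep.mp hcol
              refine ⟨⟨x, hci⟩, ⟨x, hcj⟩, ?_⟩
              rw [hci.2 a hma, hcj.1 b hmb]
              cases x <;> simp
            · rintro ⟨⟨x, hci⟩, ⟨y, hcj⟩, hne⟩
              have hca := hci.2 a hma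
              have hcb := hcj.1 b hmb
              have hyx : y = x := by
                rw [hca, hcb] at hne
                cases x <;> cases y <;> simp_all
              rw [hyx] at hcj
              exact ⟨x, ColOK_union_keep.mpr ⟨hci, hcj⟩⟩
          rw [hm]
          tauto
      · refine ⟨WFg_setErase hi hj hij hwf ?_ ?_, fun c => ?_⟩
        · rintro v (hv | hv) <;> rcases (PySem.Set.mem_union _ _ _).mp hv with hv' | hv'
          · exact Or.inl (Or.inl hv')
          · exact Or.inr (Or.inl hv')
          · exact Or.inl (Or.inr hv')
          · exact Or.inr (Or.inr hv')
        · intro v hv hv2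
          rcases (PySem.Set.mem_union _ _ _).mp hv with hv' | hv' <;>
            rcases (PySem.Set.mem_union _ _ _).mp hv2 with hv2' | hv2'
          · exact hwf.1 i hi v hv' hv2'
          · exact hwf.2 i j hi hj hij v (Or.inl hv') (Or.inr hv2')
          · exact hwf.2 i j hi hj hij v (Or.inr hv2') (Or.inl hv')
          · exact hwf.1 j hj v hv' hv2'
        · rw [GOK_setErase_iff hi hj hij, GOK_split2 (c := c) hi hj hij]
          have hm : GrpOK c (PySem.Set.union (gl[i]).1 (gl[j]).1,
              PySem.Set.union (gl[i]).2 (gl[j]).2) ↔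
              (GrpOK c (gl[i]) ∧ GrpOK c (gl[j]) ∧ c a ≠ c b) := by
            constructor
            · rintro ⟨x, hcol⟩
              obtain ⟨hci, hcj⟩ := ColOK_union_keep.mp hcol
              refine ⟨⟨x, hci⟩, ⟨x, hcj⟩, ?_⟩
              rw [hci.1 a hma, hcj.2 b hmb]
              cases x <;> simp
            · rintro ⟨⟨x, hci⟩, ⟨y, hcj⟩, hne⟩
              have hca := hci.1 a hma
              have hcb := hcj.2 b hmb
              have hyx : y = x := by
                rw [hca, hcb] at hne
                cases x <;> cases y <;> simp_all
              rw [hyx] at hcj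
              exact ⟨x, ColOK_union_keep.mpr ⟨hci, hcj⟩⟩
          rw [hm]
          tauto
      · exact absurd rfl hss

theorem bLoop_sat : ∀ (es : List (String × String)) gl, WFg gl → (∀ p ∈ es, p.1 ≠ p.2) →
    (bLoop es gl = true ↔ ∃ c, EdgesOK c es ∧ GOK c gl) := by
  intro es
  induction es with
  | nil =>
    intro gl hwf _
    obtain ⟨c, hc⟩ := exists_GOK hwf
    simp only [bLoop, true_iff]
    exact ⟨c, fun p hp => by simp at hp, hc⟩
  | cons e rest ih =>
    obtain ⟨a, b⟩ := e
    intro gl hwf hed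
    have hab : a ≠ b := hed (a, b) (List.mem_cons_self ..)
    rcases hstep : bStep gl a b with _ | gl'
    · simp only [bLoop, hstep]
      constructor
      · intro h'; cases h'
      · rintro ⟨c, hE, hG⟩
        have h1 := bStep_none hstep c hG
        have h2 := hE (a, b) (List.mem_cons_self ..)
        exact absurd h1 h2
    · simp only [bLoop, hstep]
      obtain ⟨hwf', hiff⟩ := bStep_some hstep hab hwf
      rw [ih gl' hwf' (fun p hp => hed p (List.mem_cons_of_mem _ hp))]
      constructor
      · rintro ⟨c, hE, hG⟩
        obtain ⟨hGgl, hne⟩ := (hiff c).mp hG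
        refine ⟨c, ?_, hGgl⟩
        intro p hp
        rcases List.mem_cons.mp hp with h' | h'
        · rw [h']; exact hne
        · exact hE p h'
      · rintro ⟨c, hE, hG⟩
        exact ⟨c, fun p hp => hE p (List.mem_cons_of_mem _ hp),
          (hiff c).mpr ⟨hG, hE (a, b) (List.mem_cons_self ..)⟩⟩

theorem solve_rec_alt_sat : ∀ (list : List (String × String)) (s1 s2 : List String),
    PreStrict list s1 s2 → (solve_rec_alt list s1 s2 = true ↔ Sat list s1 s2) := by
  intro l s1 s2 hpre
  unfold solve_rec_alt
  have hwf0 : WFg [(PySem.Set.ofList s1, PySem.Set.ofList s2)] := by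
    constructor
    · intro i hi v hv1 hv2
      simp at hi
      subst hi
      simp at hv1 hv2
      exact hpre.2 v hv1 hv2
    · intro i j hi hj hne
      simp at hi hj
      omega
  rw [bLoop_sat l _ hwf0 hpre.1]
  constructor
  · rintro ⟨c, hE, hG⟩
    obtain ⟨x, hx1, hx2⟩ := hG _ (List.mem_singleton.mpr rfl)
    cases x
    · refine ⟨fun v => !(c v), ?_, ?_, ?_⟩
      · intro p hp
        have := hE p hp
        beta_reduce
        simpa using this
      · intro v hv
        beta_reduce
        rw [hx1 v ((PySem.Set.mem_ofList _ _).mpr hv)]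
        rfl
      · intro v hv
        beta_reduce
        rw [hx2 v ((PySem.Set.mem_ofList _ _).mpr hv)]
        rfl
    · refine ⟨c, hE, ?_, ?_⟩
      · intro v hv
        exact hx1 v ((PySem.Set.mem_ofList _ _).mpr hv)
      · intro v hv
        have := hx2 v ((PySem.Set.mem_ofList _ _).mpr hv)
        simpa using this
  · rintro ⟨c, hE, h1, h2⟩
    refine ⟨c, hE, ?_⟩
    intro g hg
    rw [List.mem_singleton] at hg
    subst hg
    refine ⟨true, ?_, ?_⟩
    · intro v hv
      exact h1 v ((PySem.Set.mem_ofList _ _).mp hv)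
    · intro v hv
      have := h2 v ((PySem.Set.mem_ofList _ _).mp hv)
      simpa using this

-- ---- seeded self-loops force False on both sides ----

theorem aPass_loop_none : ∀ (es : List (String × String)) (s1 s2 : List String) acc (v : String),
    (v, v) ∈ es → (v ∈ s1 ∨ v ∈ s2) → aPass es s1 s2 acc = none := by
  intro es
  induction es with
  | nil => intro s1 s2 acc v hv _; simp at hv
  | cons e rest ih =>
    obtain ⟨a, b⟩ := e
    intro s1 s2 acc v hv hseed
    rcases List.mem_cons.mp hv with hv' | hv'
    · obtain ⟨ha, hb⟩ := Prod.mk.injEq .. ▸ hv'.symm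
      subst ha; subst hb
      simp only [aPass]
      split_ifs with h1 h2 h3 h4 h5 h6 <;> first | rfl | simp_all
    · simp only [aPass]
      split_ifs with h1 h2 h3 h4 h5 h6 <;>
        first
        | rfl
        | exact ih _ _ _ v hv' (by
            rcases hseed with h | h <;>
              first
              | exact Or.inl h
              | exact Or.inr h
              | exact Or.inl ((PySem.Set.mem_add _ _ _).mpr (Or.inl h))
              | exact Or.inr ((PySem.Set.mem_add _ _ _).mpr (Or.inl h)))

theorem solve_rec_loop_false {list : List (String × String)} {s1 s2 : List String} {v : String}
    (hv : (v, v) ∈ list) (hseed : v ∈ s1 ∨ v ∈ s2) : solve_rec list s1 s2 = false := by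
  have hnil : list.length ≠ 0 := by
    intro h
    rw [List.length_eq_zero_iff.mp h] at hv
    simp at hv
  have hnone := aPass_loop_none list s1 s2 [] v hv hseed
  rw [solve_rec, dif_neg hnil]
  split
  · rfl
  · rename_i nl' t1' t2' heq
    rw [hnone] at heq
    cases heq

theorem bFind_of_InG {gl : List (List String × List String)} {v : String} {g : List String × List String}
    (hg : g ∈ gl) (hv : InG v g) : ∃ p, bFind gl v = some p := by
  rcases h : bFind gl v with _ | p
  · exact absurd hv (bFind_none h g hg)
  · exact ⟨p, rfl⟩

theorem mem_set_self {α : Type} {gl : List α} {i : Nat} (hi : i < gl.length) (m : α) :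
    m ∈ gl.set i m :=
  List.mem_iff_getElem.mpr ⟨i, by rw [List.length_set]; exact hi, by rw [List.getElem_set, if_pos rfl]⟩

theorem mem_set_other {α : Type} {gl : List α} {i k : Nat} (hk : k < gl.length) (hki : k ≠ i) (m : α) :
    gl[k] ∈ gl.set i m :=
  List.mem_iff_getElem.mpr ⟨k, by rw [List.length_set]; exact hk,
    by rw [List.getElem_set, if_neg (fun h => hki h.symm)]⟩

theorem bStep_mem_mono {gl gl' : List (List String × List String)} {a b : String}
    (h : bStep gl a b = some gl') (w : String) :
    (∃ g ∈ gl, InG w g) → ∃ g' ∈ gl', InG w g' := by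
  rintro ⟨g, hg, hw⟩
  obtain ⟨k, hk, hgk⟩ := List.mem_iff_getElem.mp hg
  rw [← hgk] at hw
  clear hgk hg
  unfold bStep at h
  split at h
  case h_1 _ _ =>
    cases h
    exact ⟨gl[k], List.mem_append_left _ (gl.getElem_mem hk), hw⟩
  case h_2 i sa hfa hfb =>
    obtain ⟨hi, _⟩ := bFind_some hfa
    rw [List.getD_eq_getElem _ _ hi] at h
    cases h
    by_cases hki : k = i
    · subst hki
      refine ⟨_, mem_set_self hk _, ?_⟩
      cases sa <;> simp only [if_pos rfl, if_neg Bool.false_ne_true] <;>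
        rcases hw with hw | hw <;>
          first
          | exact Or.inl hw
          | exact Or.inr hw
          | exact Or.inl ((PySem.Set.mem_add _ _ _).mpr (Or.inl hw))
          | exact Or.inr ((PySem.Set.mem_add _ _ _).mpr (Or.inl hw))
    · exact ⟨gl[k], mem_set_other hk hki _, hw⟩
  case h_3 j sb hfa hfb =>
    obtain ⟨hj, _⟩ := bFind_some hfb
    rw [List.getD_eq_getElem _ _ hj] at h
    cases h
    by_cases hkj : k = j
    · subst hkj
      refine ⟨_, mem_set_self hk _, ?_⟩
      cases sb <;> simp only [if_pos rfl, if_neg Bool.false_ne_true] <;>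
        rcases hw with hw | hw <;>
          first
          | exact Or.inl hw
          | exact Or.inr hw
          | exact Or.inl ((PySem.Set.mem_add _ _ _).mpr (Or.inl hw))
          | exact Or.inr ((PySem.Set.mem_add _ _ _).mpr (Or.inl hw))
    · exact ⟨gl[k], mem_set_other hk hkj _, hw⟩
  case h_4 i sa j sb hfa hfb =>
    obtain ⟨hi, _⟩ := bFind_some hfa
    obtain ⟨hj, _⟩ := bFind_some hfb
    rw [List.getD_eq_getElem _ _ hi, List.getD_eq_getElem _ _ hj] at h
    split_ifs at h with hij hsab hss
    · cases h
      exact ⟨gl[k], gl.getElem_mem hk, hw⟩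
    · cases h
      by_cases hkij : k = i ∨ k = j
      · refine ⟨_, mem_setErase_m hi hj hij, ?_⟩
        have hsub : InG w (gl[i]) ∨ InG w (gl[j]) := by
          rcases hkij with h' | h'
          · exact Or.inl (h' ▸ hw)
          · exact Or.inr (h' ▸ hw)
        rcases hsub with (hw' | hw') | (hw' | hw') <;>
          first
          | exact Or.inl ((PySem.Set.mem_union _ _ _).mpr (Or.inl hw'))
          | exact Or.inl ((PySem.Set.mem_union _ _ _).mpr (Or.inr hw'))
          | exact Or.inr ((PySem.Set.mem_union _ _ _).mpr (Or.inl hw'))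
          | exact Or.inr ((PySem.Set.mem_union _ _ _).mpr (Or.inr hw'))
      · push_neg at hkij
        exact ⟨gl[k], mem_setErase_k hj hk hkij.1 hkij.2, hw⟩
    · cases h
      by_cases hkij : k = i ∨ k = j
      · refine ⟨_, mem_setErase_m hi hj hij, ?_⟩
        have hsub : InG w (gl[i]) ∨ InG w (gl[j]) := by
          rcases hkij with h' | h'
          · exact Or.inl (h' ▸ hw)
          · exact Or.inr (h' ▸ hw)
        rcases hsub with (hw' | hw') | (hw' | hw') <;>
          first
          | exact Or.inl ((PySem.Set.mem_union _ _ _).mpr (Or.inl hw'))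
          | exact Or.inl ((PySem.Set.mem_union _ _ _).mpr (Or.inr hw'))
          | exact Or.inr ((PySem.Set.mem_union _ _ _).mpr (Or.inl hw'))
          | exact Or.inr ((PySem.Set.mem_union _ _ _).mpr (Or.inr hw'))
      · push_neg at hkij
        exact ⟨gl[k], mem_setErase_k hj hk hkij.1 hkij.2, hw⟩

theorem bLoop_loop_false : ∀ (es : List (String × String)) gl (v : String),
    (v, v) ∈ es → (∃ g ∈ gl, InG v g) → bLoop es gl = false := by
  intro es
  induction es with
  | nil => intro gl v hv _; simp at hv
  | cons e rest ih =>
    obtain ⟨a, b⟩ := e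
    intro gl v hv hg
    rcases List.mem_cons.mp hv with hv' | hv'
    · rw [show ((a, b) : String × String) = (v, v) from hv'.symm]
      obtain ⟨g, hgm, hIn⟩ := hg
      obtain ⟨⟨i, sv⟩, hf⟩ := bFind_of_InG hgm hIn
      have hstep : bStep gl v v = none := by
        unfold bStep
        rw [hf]
        simp
      simp only [bLoop, hstep]
    · simp only [bLoop]
      rcases hstep : bStep gl a b with _ | gl'
      · rfl
      · exact ih gl' v hv' (bStep_mem_mono hstep v hg)

-- ---- both programs ignore seed vertices that occur in no edge ----
-- (used to reduce overlapping seed sets to the disjoint case: the overlap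
-- vertices are, under Pre_, exactly such untouched vertices)

def MSim (I : String → Prop) (t1 t2 t1' t2' : List String) : Prop :=
  ∀ v, ¬ I v → ((v ∈ t1 ↔ v ∈ t1') ∧ (v ∈ t2 ↔ v ∈ t2'))

theorem MSim_addL {I : String → Prop} {t1 t2 t1' t2' : List String} {w : String}
    (h : MSim I t1 t2 t1' t2') :
    MSim I (PySem.Set.add t1 w) t2 (PySem.Set.add t1' w) t2' := by
  intro v hv
  obtain ⟨h1, h2⟩ := h v hv
  constructor
  · rw [PySem.Set.mem_add, PySem.Set.mem_add, h1]
  · exact h2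

theorem MSim_addR {I : String → Prop} {t1 t2 t1' t2' : List String} {w : String}
    (h : MSim I t1 t2 t1' t2') :
    MSim I t1 (PySem.Set.add t2 w) t1' (PySem.Set.add t2' w) := by
  intro v hv
  obtain ⟨h1, h2⟩ := h v hv
  constructor
  · exact h1
  · rw [PySem.Set.mem_add, PySem.Set.mem_add, h2]

theorem aPass_sim (I : String → Prop) :
    ∀ (es : List (String × String)) t1 t2 t1' t2' acc,
    MSim I t1 t2 t1' t2' → (∀ p ∈ es, ¬ I p.1 ∧ ¬ I p.2) →
    (aPass es t1 t2 acc = none ∧ aPass es t1' t2' acc = none) ∨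
    (∃ nl u1 u2 u1' u2', aPass es t1 t2 acc = some (nl, u1, u2) ∧
      aPass es t1' t2' acc = some (nl, u1', u2') ∧ MSim I u1 u2 u1' u2') := by
  intro es
  induction es with
  | nil =>
    intro t1 t2 t1' t2' acc hsim _
    exact Or.inr ⟨acc, t1, t2, t1', t2', rfl, rfl, hsim⟩
  | cons e rest ih =>
    obtain ⟨a, b⟩ := e
    intro t1 t2 t1' t2' acc hsim hok
    obtain ⟨hIa, hIb⟩ := hok (a, b) (List.mem_cons_self ..)
    have hrest := fun p hp => hok p (List.mem_cons_of_mem _ hp)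
    have ha1 := (hsim a hIa).1
    have ha2 := (hsim a hIa).2
    have hb1 := (hsim b hIb).1
    have hb2 := (hsim b hIb).2
    by_cases h1 : a ∈ t1
    · by_cases h2 : b ∈ t1
      · refine Or.inl ⟨?_, ?_⟩
        · simp [aPass, h1, h2]
        · simp [aPass, ha1.mp h1, hb1.mp h2]
      · have hrec := ih t1 (PySem.Set.add t2 b) t1' (PySem.Set.add t2' b) acc (MSim_addR hsim) hrest
        rcases hrec with ⟨hx, hy⟩ | ⟨nl, u1, u2, u1', u2', hx, hy, hsim'⟩
        · refine Or.inl ⟨?_, ?_⟩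
          · simpa [aPass, h1, h2] using hx
          · simpa [aPass, ha1.mp h1, show b ∉ t1' from fun hx => h2 (hb1.mpr hx)] using hy
        · refine Or.inr ⟨nl, u1, u2, u1', u2', ?_, ?_, hsim'⟩
          · simpa [aPass, h1, h2] using hx
          · simpa [aPass, ha1.mp h1, show b ∉ t1' from fun hx => h2 (hb1.mpr hx)] using hy
    · by_cases h3 : a ∈ t2
      · by_cases h4 : b ∈ t2
        · refine Or.inl ⟨?_, ?_⟩
          · simp [aPass, h1, h3, h4]
          · simp [aPass, show a ∉ t1' from fun hx => h1 (ha1.mpr hx), ha2.mp h3, hb2.mp h4]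
        · have hrec := ih (PySem.Set.add t1 b) t2 (PySem.Set.add t1' b) t2' acc (MSim_addL hsim) hrest
          rcases hrec with ⟨hx, hy⟩ | ⟨nl, u1, u2, u1', u2', hx, hy, hsim'⟩
          · refine Or.inl ⟨?_, ?_⟩
            · simpa [aPass, h1, h3, h4] using hx
            · simpa [aPass, show a ∉ t1' from fun hx => h1 (ha1.mpr hx), ha2.mp h3, show b ∉ t2' from fun hx => h4 (hb2.mpr hx)] using hy
          · refine Or.inr ⟨nl, u1, u2, u1', u2', ?_, ?_, hsim'⟩
            · simpa [aPass, h1, h3, h4] using hx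
            · simpa [aPass, show a ∉ t1' from fun hx => h1 (ha1.mpr hx), ha2.mp h3, show b ∉ t2' from fun hx => h4 (hb2.mpr hx)] using hy
      · by_cases h5 : b ∈ t1
        · have hrec := ih t1 (PySem.Set.add t2 a) t1' (PySem.Set.add t2' a) acc (MSim_addR hsim) hrest
          rcases hrec with ⟨hx, hy⟩ | ⟨nl, u1, u2, u1', u2', hx, hy, hsim'⟩
          · refine Or.inl ⟨?_, ?_⟩
            · simpa [aPass, h1, h3, h5] using hx
            · simpa [aPass, show a ∉ t1' from fun hx => h1 (ha1.mpr hx), show a ∉ t2' from fun hx => h3 (ha2.mpr hx), hb1.mp h5] using hy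
          · refine Or.inr ⟨nl, u1, u2, u1', u2', ?_, ?_, hsim'⟩
            · simpa [aPass, h1, h3, h5] using hx
            · simpa [aPass, show a ∉ t1' from fun hx => h1 (ha1.mpr hx), show a ∉ t2' from fun hx => h3 (ha2.mpr hx), hb1.mp h5] using hy
        · by_cases h6 : b ∈ t2
          · have hrec := ih (PySem.Set.add t1 a) t2 (PySem.Set.add t1' a) t2' acc (MSim_addL hsim) hrest
            rcases hrec with ⟨hx, hy⟩ | ⟨nl, u1, u2, u1', u2', hx, hy, hsim'⟩
            · refine Or.inl ⟨?_, ?_⟩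
              · simpa [aPass, h1, h3, h5, h6] using hx
              · simpa [aPass, show a ∉ t1' from fun hx => h1 (ha1.mpr hx), show a ∉ t2' from fun hx => h3 (ha2.mpr hx), show b ∉ t1' from fun hx => h5 (hb1.mpr hx), hb2.mp h6] using hy
            · refine Or.inr ⟨nl, u1, u2, u1', u2', ?_, ?_, hsim'⟩
              · simpa [aPass, h1, h3, h5, h6] using hx
              · simpa [aPass, show a ∉ t1' from fun hx => h1 (ha1.mpr hx), show a ∉ t2' from fun hx => h3 (ha2.mpr hx), show b ∉ t1' from fun hx => h5 (hb1.mpr hx), hb2.mp h6] using hy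
          · have hrec := ih t1 t2 t1' t2' (acc ++ [(a, b)]) hsim hrest
            rcases hrec with ⟨hx, hy⟩ | ⟨nl, u1, u2, u1', u2', hx, hy, hsim'⟩
            · refine Or.inl ⟨?_, ?_⟩
              · simpa [aPass, h1, h3, h5, h6] using hx
              · simpa [aPass, show a ∉ t1' from fun hx => h1 (ha1.mpr hx), show a ∉ t2' from fun hx => h3 (ha2.mpr hx), show b ∉ t1' from fun hx => h5 (hb1.mpr hx), show b ∉ t2' from fun hx => h6 (hb2.mpr hx)] using hy
            · refine Or.inr ⟨nl, u1, u2, u1', u2', ?_, ?_, hsim'⟩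
              · simpa [aPass, h1, h3, h5, h6] using hx
              · simpa [aPass, show a ∉ t1' from fun hx => h1 (ha1.mpr hx), show a ∉ t2' from fun hx => h3 (ha2.mpr hx), show b ∉ t1' from fun hx => h5 (hb1.mpr hx), show b ∉ t2' from fun hx => h6 (hb2.mpr hx)] using hy

theorem solve_rec_sim (I : String → Prop) :
    ∀ (list : List (String × String)) (t1 t2 : List String), ∀ t1' t2',
    MSim I t1 t2 t1' t2' → (∀ p ∈ list, ¬ I p.1 ∧ ¬ I p.2) →
    solve_rec list t1 t2 = solve_rec list t1' t2' := by
  intro list t1 t2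
  induction list, t1, t2 using solve_rec.induct with
  | case1 l t1 t2 hl =>
    intro t1' t2' _ _
    rw [solve_rec, solve_rec, dif_pos hl, dif_pos hl]
  | case2 l t1 t2 hn hnone =>
    intro t1' t2' hsim hok
    have hb' : aPass l t1' t2' [] = none := by
      rcases aPass_sim I l t1 t2 t1' t2' [] hsim hok with ⟨_, h2⟩ | ⟨nl, u1, u2, u1', u2', ha', _, _⟩
      · exact h2
      · rw [hnone] at ha'; cases ha'
    have hsrL : solve_rec l t1 t2 = false := by
      rw [solve_rec, dif_neg hn]
      split
      · rfl
      · rename_i nlx t1x t2x heq; rw [hnone] at heq; cases heq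
    have hsrR : solve_rec l t1' t2' = false := by
      rw [solve_rec, dif_neg hn]
      split
      · rfl
      · rename_i nlx t1x t2x heq; rw [hb'] at heq; cases heq
    rw [hsrL, hsrR]
  | case3 l t1 t2 hn nl u1 u2 hsome hlen p ih =>
    intro t1' t2' hsim hok
    rcases aPass_sim I l t1 t2 t1' t2' [] hsim hok with ⟨ha', _⟩ | ⟨nl2, w1, w2, u1', u2', ha', hb', hsim'⟩
    · rw [hsome] at ha'; cases ha'
    · rw [hsome] at ha'
      cases ha'
      have hsrL : solve_rec l t1 t2 =
          solve_rec l.dropLast (PySem.Set.add u1 p.1) (PySem.Set.add u2 p.2) := by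
        rw [solve_rec, dif_neg hn]
        split
        · rename_i heq; rw [hsome] at heq; cases heq
        · rename_i nlx t1x t2x heq
          rw [hsome] at heq; cases heq
          rw [if_pos hlen]
      have hsrR : solve_rec l t1' t2' =
          solve_rec l.dropLast (PySem.Set.add u1' p.1) (PySem.Set.add u2' p.2) := by
        rw [solve_rec, dif_neg hn]
        split
        · rename_i heq; rw [hb'] at heq; cases heq
        · rename_i nlx t1x t2x heq
          rw [hb'] at heq; cases heq
          rw [if_pos hlen]
      rw [hsrL, hsrR]
      exact ih _ _ (MSim_addR (MSim_addL hsim'))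
        (fun q hq => hok q ((List.dropLast_sublist l).subset hq))
  | case4 l t1 t2 hn nl u1 u2 hsome hlen hnl ih =>
    intro t1' t2' hsim hok
    rcases aPass_sim I l t1 t2 t1' t2' [] hsim hok with ⟨ha', _⟩ | ⟨nl2, w1, w2, u1', u2', ha', hb', hsim'⟩
    · rw [hsome] at ha'; cases ha'
    · rw [hsome] at ha'
      cases ha'
      have hmem := aPass_mem l t1 t2 [] nl u1 u2 hsome
      rw [List.append_nil] at hmem
      have hsrL : solve_rec l t1 t2 = solve_rec nl u1 u2 := by
        rw [solve_rec, dif_neg hn]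
        split
        · rename_i heq; rw [hsome] at heq; cases heq
        · rename_i nlx t1x t2x heq
          rw [hsome] at heq; cases heq
          rw [if_neg hlen, if_pos hnl]
      have hsrR : solve_rec l t1' t2' = solve_rec nl u1' u2' := by
        rw [solve_rec, dif_neg hn]
        split
        · rename_i heq; rw [hb'] at heq; cases heq
        · rename_i nlx t1x t2x heq
          rw [hb'] at heq; cases heq
          rw [if_neg hlen, if_pos hnl]
      rw [hsrL, hsrR]
      exact ih _ _ hsim' (fun q hq => hok q (hmem q hq))
  | case5 l t1 t2 hn nl u1 u2 hsome hlen hnl =>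
    intro t1' t2' hsim hok
    rcases aPass_sim I l t1 t2 t1' t2' [] hsim hok with ⟨ha', _⟩ | ⟨nl2, w1, w2, u1', u2', ha', hb', hsim'⟩
    · rw [hsome] at ha'; cases ha'
    · rw [hsome] at ha'
      cases ha'
      have hsrL : solve_rec l t1 t2 = true := by
        rw [solve_rec, dif_neg hn]
        split
        · rename_i heq; rw [hsome] at heq; cases heq
        · rename_i nlx t1x t2x heq
          rw [hsome] at heq; cases heq
          rw [if_neg hlen, if_neg hnl]
      have hsrR : solve_rec l t1' t2' = true := by
        rw [solve_rec, dif_neg hn]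
        split
        · rename_i heq; rw [hb'] at heq; cases heq
        · rename_i nlx t1x t2x heq
          rw [hb'] at heq; cases heq
          rw [if_neg hlen, if_neg hnl]
      rw [hsrL, hsrR]

-- ===== VERDICT (by name: the statement is the Claim_ definition above) =====
-- ---- the B-side ignores untouched seed vertices as well ----

def GRel (I : String → Prop) (g g' : List String × List String) : Prop :=
  ∀ v, ¬ I v → ((v ∈ g.1 ↔ v ∈ g'.1) ∧ (v ∈ g.2 ↔ v ∈ g'.2))

theorem forall₂_getElem {α : Type} {R : α → α → Prop} :
    ∀ {l l' : List α}, List.Forall₂ R l l' → ∀ i (h : i < l.length) (h' : i < l'.length), R (l[i]) (l'[i]) := by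
  intro l l' hrel
  induction hrel with
  | nil => intro i h _; simp at h
  | cons hR _ ih =>
    intro i h h'
    cases i with
    | zero => simpa using hR
    | succ n => simpa using ih n (by simpa using h) (by simpa using h')

theorem forall₂_set {α : Type} {R : α → α → Prop} {m m' : α} :
    ∀ {l l' : List α} (i : Nat), List.Forall₂ R l l' → R m m' →
      List.Forall₂ R (l.set i m) (l'.set i m') := by
  intro l l' i hrel hm
  induction hrel generalizing i with
  | nil => simpa using List.Forall₂.nil
  | cons hR htail ih =>
    cases i with
    | zero => simpa using List.Forall₂.cons hm ‹_›
    | succ n => simpa using List.Forall₂.cons hR (ih n)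

theorem forall₂_eraseIdx {α : Type} {R : α → α → Prop} :
    ∀ {l l' : List α} (j : Nat), List.Forall₂ R l l' →
      List.Forall₂ R (l.eraseIdx j) (l'.eraseIdx j) := by
  intro l l' j hrel
  induction hrel generalizing j with
  | nil => simpa using List.Forall₂.nil
  | cons hR htail ih =>
    cases j with
    | zero => simpa using htail
    | succ n => simpa using List.Forall₂.cons hR (ih n)

theorem bFind_sim {I : String → Prop} {v : String} :
    ∀ {gl gl' : List (List String × List String)}, List.Forall₂ (GRel I) gl gl' → ¬ I v →
      bFind gl v = bFind gl' v := by
  intro gl gl' hrel hIv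
  induction hrel with
  | nil => rfl
  | cons hR htail ih =>
    rename_i g g' l l'
    obtain ⟨hl, hr⟩ := hR v hIv
    obtain ⟨g1, g2⟩ := g
    obtain ⟨g1', g2'⟩ := g'
    simp only [bFind]
    by_cases h1 : v ∈ g1
    · rw [if_pos h1, if_pos (hl.mp h1)]
    · rw [if_neg h1, if_neg (fun hx => h1 (hl.mpr hx))]
      by_cases h2 : v ∈ g2
      · rw [if_pos h2, if_pos (hr.mp h2)]
      · rw [if_neg h2, if_neg (fun hx => h2 (hr.mpr hx)), ih]

theorem GRel_add_left {I : String → Prop} {g g' : List String × List String} {w : String}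
    (h : GRel I g g') : GRel I (PySem.Set.add g.1 w, g.2) (PySem.Set.add g'.1 w, g'.2) := by
  intro v hv
  obtain ⟨h1, h2⟩ := h v hv
  exact ⟨by simp only [PySem.Set.mem_add]; rw [h1], h2⟩

theorem GRel_add_right {I : String → Prop} {g g' : List String × List String} {w : String}
    (h : GRel I g g') : GRel I (g.1, PySem.Set.add g.2 w) (g'.1, PySem.Set.add g'.2 w) := by
  intro v hv
  obtain ⟨h1, h2⟩ := h v hv
  exact ⟨h1, by simp only [PySem.Set.mem_add]; rw [h2]⟩

theorem GRel_union {I : String → Prop} {g1 g2 g1' g2' : List String}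
    (h1 : ∀ v, ¬ I v → (v ∈ g1 ↔ v ∈ g1')) (h2 : ∀ v, ¬ I v → (v ∈ g2 ↔ v ∈ g2')) :
    ∀ v, ¬ I v → (v ∈ PySem.Set.union g1 g2 ↔ v ∈ PySem.Set.union g1' g2') := by
  intro v hv
  simp only [PySem.Set.mem_union]
  rw [h1 v hv, h2 v hv]

theorem forall₂_append {α : Type} {R : α → α → Prop} :
    ∀ {l l' u u' : List α}, List.Forall₂ R l l' → List.Forall₂ R u u' →
      List.Forall₂ R (l ++ u) (l' ++ u') := by
  intro l l' u u' h hu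
  induction h with
  | nil => simpa using hu
  | cons hR _ ih => simpa using List.Forall₂.cons hR ih

theorem bStep_sim {I : String → Prop} {gl gl' : List (List String × List String)} {a b : String}
    (hrel : List.Forall₂ (GRel I) gl gl') (hIa : ¬ I a) (hIb : ¬ I b) :
    (bStep gl a b = none ∧ bStep gl' a b = none) ∨
    (∃ g2 g2', bStep gl a b = some g2 ∧ bStep gl' a b = some g2' ∧ List.Forall₂ (GRel I) g2 g2') := by
  have hlen := List.Forall₂.length_eq hrel
  have hfa := bFind_sim hrel hIa
  have hfb := bFind_sim hrel hIb
  rcases hfa' : bFind gl a with _ | ⟨i, sa⟩ <;> rcases hfb' : bFind gl b with _ | ⟨j, sb⟩ <;>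
    rw [hfa'] at hfa <;> rw [hfb'] at hfb
  · have e1 : bStep gl a b = some (gl ++ [([a], [b])]) := by
      unfold bStep; rw [hfa', hfb']
    have e2 : bStep gl' a b = some (gl' ++ [([a], [b])]) := by
      unfold bStep; rw [← hfa, ← hfb]
    exact Or.inr ⟨_, _, e1, e2, forall₂_append hrel
      (List.Forall₂.cons (fun v hv => ⟨Iff.rfl, Iff.rfl⟩) List.Forall₂.nil)⟩
  · obtain ⟨hj, _⟩ := bFind_some hfb'
    have hj' : j < gl'.length := hlen ▸ hj
    have hgd : GRel I (gl.getD j ([], [])) (gl'.getD j ([], [])) := by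
      rw [List.getD_eq_getElem _ _ hj, List.getD_eq_getElem _ _ hj']
      exact forall₂_getElem hrel j hj hj'
    have e1 : bStep gl a b = some (gl.set j
        (if sb then ((gl.getD j ([], [])).1, PySem.Set.add (gl.getD j ([], [])).2 a)
         else (PySem.Set.add (gl.getD j ([], [])).1 a, (gl.getD j ([], [])).2))) := by
      unfold bStep; rw [hfa', hfb']
    have e2 : bStep gl' a b = some (gl'.set j
        (if sb then ((gl'.getD j ([], [])).1, PySem.Set.add (gl'.getD j ([], [])).2 a)
         else (PySem.Set.add (gl'.getD j ([], [])).1 a, (gl'.getD j ([], [])).2))) := by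
      unfold bStep; rw [← hfa, ← hfb]
    rw [e1, e2]
    refine Or.inr ⟨_, _, rfl, rfl, ?_⟩
    cases sb
    · rw [if_neg Bool.false_ne_true, if_neg Bool.false_ne_true]
      exact forall₂_set j hrel (GRel_add_left hgd)
    · rw [if_pos rfl, if_pos rfl]
      exact forall₂_set j hrel (GRel_add_right hgd)
  · obtain ⟨hi, _⟩ := bFind_some hfa'
    have hi' : i < gl'.length := hlen ▸ hi
    have hgd : GRel I (gl.getD i ([], [])) (gl'.getD i ([], [])) := by
      rw [List.getD_eq_getElem _ _ hi, List.getD_eq_getElem _ _ hi']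
      exact forall₂_getElem hrel i hi hi'
    have e1 : bStep gl a b = some (gl.set i
        (if sa then ((gl.getD i ([], [])).1, PySem.Set.add (gl.getD i ([], [])).2 b)
         else (PySem.Set.add (gl.getD i ([], [])).1 b, (gl.getD i ([], [])).2))) := by
      unfold bStep; rw [hfa', hfb']
    have e2 : bStep gl' a b = some (gl'.set i
        (if sa then ((gl'.getD i ([], [])).1, PySem.Set.add (gl'.getD i ([], [])).2 b)
         else (PySem.Set.add (gl'.getD i ([], [])).1 b, (gl'.getD i ([], [])).2))) := by
      unfold bStep; rw [← hfa, ← hfb]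
    rw [e1, e2]
    refine Or.inr ⟨_, _, rfl, rfl, ?_⟩
    cases sa
    · rw [if_neg Bool.false_ne_true, if_neg Bool.false_ne_true]
      exact forall₂_set i hrel (GRel_add_left hgd)
    · rw [if_pos rfl, if_pos rfl]
      exact forall₂_set i hrel (GRel_add_right hgd)
  · obtain ⟨hi, _⟩ := bFind_some hfa'
    obtain ⟨hj, _⟩ := bFind_some hfb'
    have hi' : i < gl'.length := hlen ▸ hi
    have hj' : j < gl'.length := hlen ▸ hj
    have hgi : GRel I (gl.getD i ([], [])) (gl'.getD i ([], [])) := by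
      rw [List.getD_eq_getElem _ _ hi, List.getD_eq_getElem _ _ hi']
      exact forall₂_getElem hrel i hi hi'
    have hgj : GRel I (gl.getD j ([], [])) (gl'.getD j ([], [])) := by
      rw [List.getD_eq_getElem _ _ hj, List.getD_eq_getElem _ _ hj']
      exact forall₂_getElem hrel j hj hj'
    have e1 : bStep gl a b = (if i = j then (if sa = sb then none else some gl)
        else some ((gl.set i (if sa = sb then
              (PySem.Set.union (gl.getD i ([], [])).1 (gl.getD j ([], [])).2,
               PySem.Set.union (gl.getD i ([], [])).2 (gl.getD j ([], [])).1)
            else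
              (PySem.Set.union (gl.getD i ([], [])).1 (gl.getD j ([], [])).1,
               PySem.Set.union (gl.getD i ([], [])).2 (gl.getD j ([], [])).2))).eraseIdx j)) := by
      unfold bStep; rw [hfa', hfb']
    have e2 : bStep gl' a b = (if i = j then (if sa = sb then none else some gl')
        else some ((gl'.set i (if sa = sb then
              (PySem.Set.union (gl'.getD i ([], [])).1 (gl'.getD j ([], [])).2,
               PySem.Set.union (gl'.getD i ([], [])).2 (gl'.getD j ([], [])).1)
            else
              (PySem.Set.union (gl'.getD i ([], [])).1 (gl'.getD j ([], [])).1,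
               PySem.Set.union (gl'.getD i ([], [])).2 (gl'.getD j ([], [])).2))).eraseIdx j)) := by
      unfold bStep; rw [← hfa, ← hfb]
    rw [e1, e2]
    by_cases hij : i = j
    · rw [if_pos hij, if_pos hij]
      by_cases hss : sa = sb
      · rw [if_pos hss, if_pos hss]
        exact Or.inl ⟨rfl, rfl⟩
      · rw [if_neg hss, if_neg hss]
        exact Or.inr ⟨_, _, rfl, rfl, hrel⟩
    · rw [if_neg hij, if_neg hij]
      refine Or.inr ⟨_, _, rfl, rfl, forall₂_eraseIdx j (forall₂_set i hrel ?_)⟩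
      by_cases hss : sa = sb
      · rw [if_pos hss, if_pos hss]
        intro v hv
        exact ⟨GRel_union (fun v hv => (hgi v hv).1) (fun v hv => (hgj v hv).2) v hv,
               GRel_union (fun v hv => (hgi v hv).2) (fun v hv => (hgj v hv).1) v hv⟩
      · rw [if_neg hss, if_neg hss]
        intro v hv
        exact ⟨GRel_union (fun v hv => (hgi v hv).1) (fun v hv => (hgj v hv).1) v hv,
               GRel_union (fun v hv => (hgi v hv).2) (fun v hv => (hgj v hv).2) v hv⟩

theorem bLoop_sim {I : String → Prop} :
    ∀ (es : List (String × String)) {gl gl' : List (List String × List String)},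
    List.Forall₂ (GRel I) gl gl' → (∀ p ∈ es, ¬ I p.1 ∧ ¬ I p.2) →
    bLoop es gl = bLoop es gl' := by
  intro es
  induction es with
  | nil => intro gl gl' _ _; rfl
  | cons e rest ih =>
    obtain ⟨a, b⟩ := e
    intro gl gl' hrel hok
    obtain ⟨hIa, hIb⟩ := hok (a, b) (List.mem_cons_self ..)
    rcases bStep_sim hrel hIa hIb with ⟨hs1, hs2⟩ | ⟨g2, g2', hs1, hs2, hrel'⟩
    · simp only [bLoop, hs1, hs2]
    · simp only [bLoop, hs1, hs2]
      exact ih hrel' (fun p hp => hok p (List.mem_cons_of_mem _ hp))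

theorem solve_rec_spec : Claim_equal_solve_rec := by
  intro list set1 set2 _ hpre
  unfold Spec_solve_rec
  by_cases hloop : ∃ p ∈ list, p.1 = p.2
  · -- a self-loop is present; under Pre_ its vertex is seeded, and both sides return false
    obtain ⟨p, hp, hpe⟩ := hloop
    have hv : (p.1, p.1) ∈ list := by
      have hpp : p = (p.1, p.1) := by
        conv_lhs => rw [show p = (p.1, p.2) from rfl]
        rw [hpe]
      rwa [hpp] at hp
    have hseed : p.1 ∈ set1 ∨ p.1 ∈ set2 := hpre.2 p hp hpe
    have hA := solve_rec_loop_false hv hseed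
    have hB : solve_rec_alt list set1 set2 = false := by
      unfold solve_rec_alt
      refine bLoop_loop_false list _ p.1 hv ⟨_, List.mem_singleton.mpr rfl, ?_⟩
      rcases hseed with h | h
      · exact Or.inl ((PySem.Set.mem_ofList _ _).mpr h)
      · exact Or.inr ((PySem.Set.mem_ofList _ _).mpr h)
    rw [hA, hB]
  · -- no self-loops: both programs ignore the (untouched) overlap vertices,
    -- so the runs reduce to the disjointified seeds and the Sat theorems apply
    push_neg at hloop
    have hI : ∀ p ∈ list, ¬ (p.1 ∈ set1 ∧ p.1 ∈ set2) ∧ ¬ (p.2 ∈ set1 ∧ p.2 ∈ set2) :=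
      hpre.1
    have hstrict : PreStrict list set1 (PySem.Set.diff set2 set1) := by
      refine ⟨hloop, ?_⟩
      intro v hv hv2
      exact ((PySem.Set.mem_diff _ _ _).mp hv2).2 hv
    have hA := solve_rec_sat list set1 (PySem.Set.diff set2 set1) hstrict
    have hB := solve_rec_alt_sat list set1 (PySem.Set.diff set2 set1) hstrict
    have hsimA : solve_rec list set1 set2 =
        solve_rec list set1 (PySem.Set.diff set2 set1) := by
      refine solve_rec_sim (fun v => v ∈ set1 ∧ v ∈ set2) list set1 set2 _ _ ?_ hI
      intro v hv
      refine ⟨Iff.rfl, ?_⟩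
      rw [PySem.Set.mem_diff]
      constructor
      · intro h2; exact ⟨h2, fun h1 => hv ⟨h1, h2⟩⟩
      · intro h2; exact h2.1
    have hsimB : solve_rec_alt list set1 set2 =
        solve_rec_alt list set1 (PySem.Set.diff set2 set1) := by
      unfold solve_rec_alt
      refine bLoop_sim (I := fun v => v ∈ set1 ∧ v ∈ set2) list ?_ hI
      refine List.Forall₂.cons ?_ List.Forall₂.nil
      intro v hv
      refine ⟨Iff.rfl, ?_⟩
      rw [PySem.Set.mem_ofList, PySem.Set.mem_ofList, PySem.Set.mem_diff]
      constructor
      · intro h2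
        refine ⟨h2, fun h1 => hv ⟨?_, h2⟩⟩
        exact h1
      · intro h2; exact h2.1
    rw [hsimA, hsimB]
    exact Bool.eq_iff_iff.mpr (hA.trans hB.symm)
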